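-- pv_equiv track=rewrite | github.com/darrenjedwards/spdp-observer-p-vs-np | spdp_all_in_one.py | rank_stream
-- ===== SOURCE A (Python) =====
-- from typing import Dict, Tuple, Iterable, List
-- from typing import List, Tuple, Dict, Optional, Set
--
-- PRIME = 1_000_003
--
-- def mod_inv(a: int, p: int = PRIME) -> int:
--     a %= p
--     if a == 0:
--         raise ZeroDivisionError("inverse of 0")
--     return pow(a, p - 2, p)
--
-- def rank_stream(vectors: Iterable[Dict[int, int]], ncols: int) -> int:
--     basis: Dict[int, Dict[int, int]] = {}
--     rank = 0
--     for vec0 in vectors: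
--         v = {j: (val % PRIME) for j, val in vec0.items() if (val % PRIME) != 0}
--         while v:
--             pivot = max(v.keys())
--             if pivot in basis:
--                 b = basis[pivot]
--                 factor = v[pivot]
--                 for j, bj in b.items():
--                     v[j] = (v.get(j, 0) - factor * bj) % PRIME
--                     if v[j] == 0:
--                         v.pop(j, None)
--             else:
--                 inv = mod_inv(v[pivot])
--                 for j in list(v.keys()):
--                     v[j] = (v[j] * inv) % PRIME
--                 basis[pivot] = v
--                 rank += 1
--                 break
--     return rank
-- ===== SOURCE B (Python) =====
-- PRIME = 1_000_003
--
-- def rank_stream(vectors, ncols):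
--     # Offline column-oriented Gaussian elimination: collect all (nonzero, reduced-mod-p)
--     # rows first, then sweep the distinct columns in decreasing order, pivoting at most
--     # once per column and eliminating that column from every other remaining row.
--     rows = []
--     for vec0 in vectors:
--         r = {j: val % PRIME for j, val in vec0.items() if val % PRIME != 0}
--         if r:
--             rows.append(r)
--     cols = sorted({j for r in rows for j in r}, reverse=True)
--     rank = 0
--     for c in cols:
--         pivot = None
--         rest = []
--         for r in rows:
--             if pivot is None and c in r:
--                 pivot = r
--             else:
--                 rest.append(r)
--         if pivot is None:
--             continue
--         rank += 1
--         inv = pow(pivot[c], PRIME - 2, PRIME)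
--         prow = {j: (val * inv) % PRIME for j, val in pivot.items()}
--         rows = []
--         for r in rest:
--             f = r.get(c, 0)
--             if f:
--                 r2 = {}
--                 for j in set(r) | set(prow):
--                     x = (r.get(j, 0) - f * prow.get(j, 0)) % PRIME
--                     if x:
--                         r2[j] = x
--                 rows.append(r2)
--             else:
--                 rows.append(r)
--     return rank
-- ===== Notes on version B (the rewrite author's own statement) =====
-- stated objective: alternative
-- what changed: A is streaming incremental elimination: each incoming vector is repeatedly reduced against a pivot-keyed basis dict (while-loop recomputing the max column) and, if nonzero, normalized and added to the basis; B instead first collects all nonzero mod-p rows and then runs offline column-oriented Gaussian elimination, sweeping the distinct columns in decreasing order, picking one pivot row per column, scaling it, eliminating that column from every other remaining row, and counting pivots.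
import Mathlib
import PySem

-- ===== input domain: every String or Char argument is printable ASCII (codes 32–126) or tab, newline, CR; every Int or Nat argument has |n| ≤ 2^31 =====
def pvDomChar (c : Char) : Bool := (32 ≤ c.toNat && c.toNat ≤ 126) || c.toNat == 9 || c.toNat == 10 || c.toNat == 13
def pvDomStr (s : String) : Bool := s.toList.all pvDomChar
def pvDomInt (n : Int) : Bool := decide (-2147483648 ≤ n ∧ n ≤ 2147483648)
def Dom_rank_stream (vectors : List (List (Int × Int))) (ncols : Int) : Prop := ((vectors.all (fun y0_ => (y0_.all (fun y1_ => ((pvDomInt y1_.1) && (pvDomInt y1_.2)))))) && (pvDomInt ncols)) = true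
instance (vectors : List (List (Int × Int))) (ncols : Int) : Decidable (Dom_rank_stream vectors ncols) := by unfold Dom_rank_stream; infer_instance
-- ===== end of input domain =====

-- B replaces A's streaming incremental elimination (reduce each incoming vector against a
-- pivot-keyed basis dict) by offline column-oriented Gaussian elimination (collect all rows,
-- sweep distinct columns in decreasing order, one pivot per column); same return value.

-- ===== PORT A =====
def pvPRIME : Int := 1000003

-- Python mod_inv: `a %= p; if a == 0: raise ...; return pow(a, p-2, p)`.
-- rank_stream only calls it on values that are nonzero mod PRIME, so the raise branch is
-- unreachable there; pow(a, p-2, p) is PySem.Int.powMod a 1000001 pvPRIME.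
def mod_inv (a : Int) : Int :=
  PySem.Int.powMod (PySem.Int.mod a pvPRIME) 1000001 pvPRIME

-- `{j: (val % PRIME) for j, val in vec0.items() if (val % PRIME) != 0}`
def reduceVec (vec0 : List (Int × Int)) : PySem.Dict Int Int :=
  (PySem.Dict.ofList vec0).items.foldl
    (fun acc jv =>
      if PySem.Int.mod jv.2 pvPRIME ≠ 0 then acc.insert jv.1 (PySem.Int.mod jv.2 pvPRIME) else acc)
    PySem.Dict.empty

-- `max(v.keys())` on the nonempty dict v (none ↔ v empty, guarding the loop)
def maxKey (v : PySem.Dict Int Int) : Option Int :=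
  PySem.List.max? v.keys (fun x => x)

-- A's inner loop: `for j, bj in b.items(): v[j] = (v.get(j,0) - factor*bj) % PRIME; if v[j]==0: v.pop(j,None)`
def sureduceVecA (c : Int) (v b : PySem.Dict Int Int) : PySem.Dict Int Int :=
  b.items.foldl
    (fun v jb =>
      let x := PySem.Int.mod (v.getD jb.1 0 - c * jb.2) pvPRIME
      let v' := v.insert jb.1 x
      if x = 0 then v'.erase jb.1 else v')
    v

-- A's normalization: `for j in list(v.keys()): v[j] = (v[j] * inv) % PRIME` (every j is a key of v)
def normA (v : PySem.Dict Int Int) (inv : Int) : PySem.Dict Int Int :=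
  v.keys.foldl (fun w j => w.insert j (PySem.Int.mod (w.getD j 0 * inv) pvPRIME)) v

-- A's `while v:` loop; fuel basis.size + 1 always suffices: each round that does not stop
-- eliminates the current max key against a basis row, so the successive pivots are strictly
-- decreasing members of the basis key set (established by the lemmas below).
def aloop : Nat → PySem.Dict Int (PySem.Dict Int Int) → Int → PySem.Dict Int Int →
    PySem.Dict Int (PySem.Dict Int Int) × Int
  | 0, basis, rank, _ => (basis, rank)
  | fuel + 1, basis, rank, v =>
    match maxKey v with
    | none => (basis, rank)
    | some pivot =>
      match basis.get? pivot with
      | some b => aloop fuel basis rank (sureduceVecA (v.getD pivot 0) v b)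
      | none => (basis.insert pivot (normA v (mod_inv (v.getD pivot 0))), rank + 1)

def rank_stream (vectors : List (List (Int × Int))) (ncols : Int) : Int :=
  (vectors.foldl (fun st vec0 => aloop (st.1.size + 1) st.1 st.2 (reduceVec vec0))
    (PySem.Dict.empty, 0)).2

-- ===== PORT B =====
-- B's row builder `{j: val % PRIME for j, val in vec0.items() if val % PRIME != 0}` is the
-- same dict comprehension as A's, so B's port shares the helper `reduceVec` above.
-- `rows = []; for vec0 in vectors: r = {...}; if r: rows.append(r)`
def collectRows (vectors : List (List (Int × Int))) : List (PySem.Dict Int Int) :=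
  vectors.foldl (fun rows vec0 =>
    let r := reduceVec vec0
    if r.items = [] then rows else rows ++ [r]) []

-- `cols = sorted({j for r in rows for j in r}, reverse=True)`
def colsOf (rows : List (PySem.Dict Int Int)) : List Int :=
  PySem.List.sorted (PySem.Set.ofList (rows.flatMap (fun r => r.keys))) (fun x => x) true

-- `pivot = None; rest = []; for r in rows: if pivot is None and c in r: pivot = r else: rest.append(r)`
def splitPivot (c : Int) (rows : List (PySem.Dict Int Int)) :
    Option (PySem.Dict Int Int) × List (PySem.Dict Int Int) :=
  rows.foldl (fun acc r =>
    match acc.1 with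
    | none => if r.contains c then (some r, acc.2) else (none, acc.2 ++ [r])
    | some p => (some p, acc.2 ++ [r])) (none, [])

-- `prow = {j: (val * inv) % PRIME for j, val in pivot.items()}`
def scaleRow (pivotRow : PySem.Dict Int Int) (inv : Int) : PySem.Dict Int Int :=
  pivotRow.items.foldl
    (fun d jv => d.insert jv.1 (PySem.Int.mod (jv.2 * inv) pvPRIME)) PySem.Dict.empty

-- `r2 = {}; for j in set(r) | set(prow): x = (r.get(j,0) - f*prow.get(j,0)) % PRIME; if x: r2[j] = x`
def elimRow (f : Int) (prow r : PySem.Dict Int Int) : PySem.Dict Int Int :=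
  (PySem.Set.ofList (r.keys ++ prow.keys)).foldl
    (fun d j =>
      let x := PySem.Int.mod (r.getD j 0 - f * prow.getD j 0) pvPRIME
      if x ≠ 0 then d.insert j x else d)
    PySem.Dict.empty

-- body of B's `for c in cols:` loop
def colStep (st : List (PySem.Dict Int Int) × Int) (c : Int) :
    List (PySem.Dict Int Int) × Int :=
  match splitPivot c st.1 with
  | (none, _) => st
  | (some pivotRow, rest) =>
    let inv := PySem.Int.powMod (pivotRow.getD c 0) 1000001 pvPRIME
    let prow := scaleRow pivotRow inv
    let rows' := rest.foldl (fun acc r =>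
      let f := r.getD c 0
      if f ≠ 0 then acc ++ [elimRow f prow r] else acc ++ [r]) []
    (rows', st.2 + 1)

def rank_stream_alt (vectors : List (List (Int × Int))) (ncols : Int) : Int :=
  let rows := collectRows vectors
  ((colsOf rows).foldl colStep (rows, 0)).2

-- ===== PRECONDITION & SPEC =====
def Spec_rank_stream (vectors : List (List (Int × Int))) (ncols : Int) (out : Int) : Prop := out = rank_stream_alt vectors ncols
instance (vectors : List (List (Int × Int))) (ncols : Int) (out : Int) : Decidable (Spec_rank_stream vectors ncols out) := by unfold Spec_rank_stream; infer_instance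

-- ===== CLAIM (what is proved, stated in full; the proofs are below) =====
def Claim_equal_rank_stream : Prop := ∀ (vectors : List (List (Int × Int))) (ncols : Int), Dom_rank_stream vectors ncols → Spec_rank_stream vectors ncols (rank_stream vectors ncols)

-- ===== LEMMAS AND PROOFS =====

-- ===== span theory over ZMod 1000003 =====

def toFun (d : PySem.Dict Int Int) : Int → ZMod 1000003 := fun c => ((d.getD c 0 : Int) : ZMod 1000003)

inductive InSpan (L : List (Int → ZMod 1000003)) : (Int → ZMod 1000003) → Prop
  | zero : InSpan L (fun _ => 0)
  | step (a : ZMod 1000003) (r : Int → ZMod 1000003) (hr : r ∈ L) (w : Int → ZMod 1000003)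
      (hw : InSpan L w) : InSpan L (fun c => a * r c + w c)

theorem inSpan_ext {L : List (Int → ZMod 1000003)} {v w : Int → ZMod 1000003}
    (h : InSpan L v) (he : ∀ c, v c = w c) : InSpan L w := (funext he) ▸ h

theorem inSpan_mem {L : List (Int → ZMod 1000003)} {r : Int → ZMod 1000003} (hr : r ∈ L) :
    InSpan L r :=
  inSpan_ext (InSpan.step 1 r hr (fun _ => 0) InSpan.zero) (fun c => by ring)

theorem inSpan_smul {L : List (Int → ZMod 1000003)} {v : Int → ZMod 1000003}
    (a : ZMod 1000003) (h : InSpan L v) : InSpan L (fun c => a * v c) := by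
  induction h with
  | zero => exact inSpan_ext InSpan.zero (fun c => by ring)
  | step b r hr w hw ih =>
      exact inSpan_ext (InSpan.step (a * b) r hr _ ih) (fun c => by ring)

theorem inSpan_add {L : List (Int → ZMod 1000003)} {v w : Int → ZMod 1000003}
    (h1 : InSpan L v) (h2 : InSpan L w) : InSpan L (fun c => v c + w c) := by
  induction h1 with
  | zero => exact inSpan_ext h2 (fun c => by ring)
  | step a r hr u hu ih =>
      exact inSpan_ext (InSpan.step a r hr _ ih) (fun c => by ring)

theorem inSpan_sub {L : List (Int → ZMod 1000003)} {v w : Int → ZMod 1000003}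
    (h1 : InSpan L v) (h2 : InSpan L w) : InSpan L (fun c => v c - w c) := by
  have := inSpan_add h1 (inSpan_smul (-1) h2)
  exact inSpan_ext this (fun c => by ring)

theorem inSpan_mono {L M : List (Int → ZMod 1000003)} {v : Int → ZMod 1000003}
    (hsub : ∀ x ∈ L, InSpan M x) (h : InSpan L v) : InSpan M v := by
  induction h with
  | zero => exact InSpan.zero
  | step a r hr w hw ih => exact inSpan_add (inSpan_smul a (hsub r hr)) ih

theorem inSpan_nil {v : Int → ZMod 1000003} (h : InSpan [] v) : ∀ c, v c = 0 := by
  induction h with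
  | zero => intro c; rfl
  | step a r hr w hw ih => cases hr

theorem inSpan_decomp {r : Int → ZMod 1000003} {L : List (Int → ZMod 1000003)}
    {v : Int → ZMod 1000003} (h : InSpan (r :: L) v) :
    ∃ a w, InSpan L w ∧ ∀ c, v c = a * r c + w c := by
  induction h with
  | zero => exact ⟨0, fun _ => 0, InSpan.zero, fun c => by ring⟩
  | step b s hs u hu ih =>
      obtain ⟨a, w, hw, he⟩ := ih
      rcases List.mem_cons.mp hs with rfl | hsL
      · exact ⟨b + a, w, hw, fun c => by simp only []; rw [he c]; ring⟩
      · exact ⟨a, fun c => b * s c + w c, InSpan.step b s hsL w hw,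
          fun c => by simp only []; rw [he c]; ring⟩

theorem inSpan_vanish {L : List (Int → ZMod 1000003)} {v : Int → ZMod 1000003} {p : Int}
    (hL : ∀ r ∈ L, ∀ c, p ≤ c → r c = 0) (h : InSpan L v) : ∀ c, p ≤ c → v c = 0 := by
  induction h with
  | zero => intro c _; rfl
  | step a r hr w hw ih => intro c hc; simp only []; rw [hL r hr c hc, ih c hc]; ring

-- ===== echelon lists =====

def EchRow (pr : Int × (Int → ZMod 1000003)) : Prop :=
  pr.2 pr.1 ≠ 0 ∧ ∀ c, pr.1 < c → pr.2 c = 0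

def Ech (E : List (Int × (Int → ZMod 1000003))) : Prop :=
  (E.map Prod.fst).Nodup ∧ ∀ pr ∈ E, EchRow pr

theorem tri_sorted (E : List (Int × (Int → ZMod 1000003)))
    (hsort : E.Pairwise (fun x y => y.1 < x.1)) (hrows : ∀ pr ∈ E, EchRow pr) :
    ∀ v, InSpan (E.map Prod.snd) v → ∀ t, v t ≠ 0 → (∀ c, t < c → v c = 0) →
    t ∈ E.map Prod.fst := by
  induction E with
  | nil =>
      intro v hv t hvt _
      exact absurd (inSpan_nil hv t) hvt
  | cons pr E' ih =>
      intro v hv t hvt htop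
      haveI : Fact (Nat.Prime 1000003) := ⟨by norm_num⟩
      obtain ⟨hlt, hsort'⟩ := List.pairwise_cons.mp hsort
      obtain ⟨a, w, hw, he⟩ := inSpan_decomp hv
      by_cases ha : a = 0
      · have : t ∈ E'.map Prod.fst := by
          apply ih hsort' (fun q hq => hrows q (List.mem_cons_of_mem _ hq)) w
            (by exact hw) t
          · intro h0; apply hvt; rw [he t, ha, h0]; ring
          · intro c hc
            have := htop c hc
            rw [he c, ha] at this
            simpa using this
        exact List.mem_cons_of_mem _ this
      · -- lead of v is pr.1
        have hwvan : ∀ c, pr.1 ≤ c → w c = 0 := by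
          apply inSpan_vanish (p := pr.1) _ hw
          intro r hr c hc
          rcases List.mem_map.mp hr with ⟨q, hq, rfl⟩
          exact (hrows q (List.mem_cons_of_mem _ hq)).2 c (lt_of_lt_of_le (hlt q hq) hc)
        have hvp : v pr.1 ≠ 0 := by
          rw [he pr.1, hwvan pr.1 le_rfl]
          have := (hrows pr List.mem_cons_self).1
          simpa using mul_ne_zero ha this
        have hvc : ∀ c, pr.1 < c → v c = 0 := by
          intro c hc
          rw [he c, (hrows pr List.mem_cons_self).2 c hc, hwvan c (le_of_lt hc)]
          ring
        have : t = pr.1 := by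
          rcases lt_trichotomy t pr.1 with h | h | h
          · exact absurd (htop pr.1 h) hvp
          · exact h
          · exact absurd (hvc t h) hvt
        simp [this]

theorem ech_sorted (E : List (Int × (Int → ZMod 1000003))) (hE : Ech E) :
    ∃ E' : List (Int × (Int → ZMod 1000003)), E'.Perm E ∧ E'.Pairwise (fun x y => y.1 < x.1) := by
  refine ⟨PySem.List.sorted E (fun pr => pr.1) true, PySem.List.sorted_perm _ _ _, ?_⟩
  have hge := PySem.List.sorted_pairwise_rev (xs := E) (key := fun pr => pr.1)
  have hnd : ((PySem.List.sorted E (fun pr => pr.1) true).map Prod.fst).Nodup :=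
    ((PySem.List.sorted_perm E (fun pr => pr.1) true).map Prod.fst).nodup_iff.mpr hE.1
  have hne : (PySem.List.sorted E (fun pr => pr.1) true).Pairwise (fun x y => x.1 ≠ y.1) := by
    have := (List.pairwise_map (f := Prod.fst)).mp hnd
    exact this
  exact (hge.and hne).imp (fun h => lt_of_le_of_ne h.1 (Ne.symm h.2))

theorem tri (E : List (Int × (Int → ZMod 1000003))) (hE : Ech E)
    (v : Int → ZMod 1000003) (hv : InSpan (E.map Prod.snd) v) (t : Int)
    (hvt : v t ≠ 0) (htop : ∀ c, t < c → v c = 0) : t ∈ E.map Prod.fst := by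
  obtain ⟨E', hperm, hsort⟩ := ech_sorted E hE
  have h1 : t ∈ E'.map Prod.fst := by
    apply tri_sorted E' hsort (fun pr hpr => hE.2 pr (hperm.mem_iff.mp hpr)) v _ t hvt htop
    exact inSpan_mono (fun x hx => inSpan_mem ((hperm.map Prod.snd).mem_iff.mpr hx)) hv
  exact (hperm.map Prod.fst).mem_iff.mp h1

theorem ech_size_eq (E1 E2 : List (Int × (Int → ZMod 1000003)))
    (h1 : Ech E1) (h2 : Ech E2)
    (hspan : ∀ u, InSpan (E1.map Prod.snd) u ↔ InSpan (E2.map Prod.snd) u) :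
    E1.length = E2.length := by
  have main : ∀ (F G : List (Int × (Int → ZMod 1000003))), Ech F → Ech G →
      (∀ u, InSpan (F.map Prod.snd) u → InSpan (G.map Prod.snd) u) →
      ∀ p ∈ F.map Prod.fst, p ∈ G.map Prod.fst := by
    intro F G hF hG himp p hp
    rcases List.mem_map.mp hp with ⟨pr, hprF, rfl⟩
    have hrow := hF.2 pr hprF
    exact tri G hG pr.2 (himp _ (inSpan_mem (List.mem_map.mpr ⟨pr, hprF, rfl⟩)))
      pr.1 hrow.1 hrow.2
  have hperm : (E1.map Prod.fst).Perm (E2.map Prod.fst) := by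
    apply List.perm_ext_iff_of_nodup h1.1 h2.1 |>.mpr
    intro p
    exact ⟨main E1 E2 h1 h2 (fun u => (hspan u).mp) p,
           main E2 E1 h2 h1 (fun u => (hspan u).mpr) p⟩
  simpa using hperm.length_eq

-- ===== dict plumbing (shared by both ports' analyses) =====

theorem filter_map_overwrite {ν : Type} (k : Int) (x : ν) (l : List (Int × ν)) :
    List.filter (fun p => !(p.1 == k)) (List.map (fun p => if (p.1 == k) = true then (k, x) else p) l)
      = List.filter (fun p => !(p.1 == k)) l := by
  induction l with
  | nil => rfl
  | cons h t ih =>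
    cases hbk : (h.1 == k) <;>
      simp only [List.map_cons, List.filter_cons, hbk, if_true, if_false, Bool.not_true,
        Bool.not_false, BEq.rfl, ih, Bool.false_eq_true, ite_false, ite_true]

theorem insert_erase_same {ν : Type} (d : PySem.Dict Int ν) (k : Int) (x : ν) :
    (d.insert k x).erase k = d.erase k := by
  apply PySem.Dict.ext
  by_cases h : d.contains k = true
  · simpa [PySem.Dict.insert, PySem.Dict.erase, h] using filter_map_overwrite k x d.items
  · simp [PySem.Dict.insert, PySem.Dict.erase, h, List.filter_append]

theorem get?_erase {ν : Type} (d : PySem.Dict Int ν) (k q : Int) :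
    (d.erase k).get? q = if q = k then none else d.get? q := by
  simp only [PySem.Dict.get?, PySem.Dict.erase]
  by_cases hqk : q = k
  · subst hqk
    rw [if_pos rfl, List.find?_eq_none.mpr, Option.map_none]
    intro p hp
    simp only [List.mem_filter] at hp
    simpa using hp.2
  · rw [if_neg hqk]
    induction d.items with
    | nil => simp
    | cons hd t ih =>
      have hkq : (k == q) = false := by simp; omega
      have hqk' : (q == k) = false := by simp [hqk]
      by_cases h1 : hd.1 = k
      · have hq : (hd.1 == q) = false := by rw [h1]; exact hkq
        simp only [List.filter_cons, h1, BEq.rfl, Bool.not_true, Bool.false_eq_true, if_false,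
          List.find?_cons, hq, ih, hkq]
      · have hk' : (hd.1 == k) = false := by simp [h1]
        by_cases h2 : hd.1 = q
        · simp only [List.filter_cons, hk', Bool.not_false, if_true, List.find?_cons,
            h2, BEq.rfl, hqk']
        · have hq' : (hd.1 == q) = false := by simp [h2]
          simp only [List.filter_cons, hk', Bool.not_false, if_true, List.find?_cons, hq', ih]

theorem mem_keys_erase {ν : Type} (d : PySem.Dict Int ν) (k q : Int)
    (h : q ∈ (d.erase k).keys) : q ∈ d.keys := by
  simp only [PySem.Dict.keys, PySem.Dict.erase, List.mem_map] at *
  obtain ⟨p, hp, rfl⟩ := h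
  exact ⟨p, (List.mem_filter.mp hp).1, rfl⟩

theorem nodup_keys_erase {ν : Type} (d : PySem.Dict Int ν) (k : Int)
    (h : d.keys.Nodup) : (d.erase k).keys.Nodup := by
  simp only [PySem.Dict.keys, PySem.Dict.erase] at *
  exact ((List.filter_sublist (p := fun p => !(p.1 == k))).map _).nodup h

theorem mem_items_erase {ν : Type} (d : PySem.Dict Int ν) (k : Int) (p : Int × ν)
    (h : p ∈ (d.erase k).items) : p ∈ d.items :=
  (List.mem_filter.mp h).1

theorem get?_mapValues {ν : Type} (l : List (Int × ν)) (g : Int → ν → ν) (q : Int) :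
    (PySem.Dict.mk (l.map (fun jv => (jv.1, g jv.1 jv.2)))).get? q
      = ((PySem.Dict.mk l).get? q).map (g q) := by
  simp only [PySem.Dict.get?]
  induction l with
  | nil => simp
  | cons hd t ih =>
    cases hbq : (hd.1 == q)
    · simpa only [List.map_cons, List.find?_cons, hbq] using ih
    · have : hd.1 = q := by rwa [beq_iff_eq] at hbq
      subst this
      simp [List.find?_cons, hbq]

-- the erase-form of A's inner elimination loop (proof helper)
def sureduceVecE (c : Int) (v b : PySem.Dict Int Int) : PySem.Dict Int Int :=
  b.items.foldl
    (fun v jb =>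
      let x := PySem.Int.mod (v.getD jb.1 0 - c * jb.2) pvPRIME
      if x = 0 then v.erase jb.1 else v.insert jb.1 x)
    v

theorem subA_eq_subE (c : Int) (v b : PySem.Dict Int Int) :
    sureduceVecA c v b = sureduceVecE c v b := by
  unfold sureduceVecA sureduceVecE
  apply PySem.List.foldl_congr_mem
  intro acc jb _
  by_cases hx : PySem.Int.mod (acc.getD jb.1 0 - c * jb.2) pvPRIME = 0 <;>
    simp only [hx, if_true, if_false, ite_true, ite_false, insert_erase_same]

theorem sub_get?_of_not_mem (c : Int) (l : List (Int × Int)) :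
    ∀ (v : PySem.Dict Int Int) (q : Int), q ∉ l.map Prod.fst →
    (l.foldl (fun v jb =>
      let x := PySem.Int.mod (v.getD jb.1 0 - c * jb.2) pvPRIME
      if x = 0 then v.erase jb.1 else v.insert jb.1 x) v).get? q = v.get? q := by
  induction l with
  | nil => intro v q _; rfl
  | cons jb l' ih =>
    intro v q hq
    simp only [List.map_cons, List.mem_cons, not_or] at hq
    simp only [List.foldl_cons]
    rw [ih _ _ hq.2]
    by_cases hx : PySem.Int.mod (v.getD jb.1 0 - c * jb.2) pvPRIME = 0
    · simp only [hx, if_true, ite_true, get?_erase, if_neg hq.1]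
    · simp only [hx, if_false, ite_false, PySem.Dict.get?_insert_of_ne _ _ hq.1]

theorem sub_mem_keys (c : Int) (l : List (Int × Int)) :
    ∀ (v : PySem.Dict Int Int) (q : Int),
    q ∈ (l.foldl (fun v jb =>
      let x := PySem.Int.mod (v.getD jb.1 0 - c * jb.2) pvPRIME
      if x = 0 then v.erase jb.1 else v.insert jb.1 x) v).keys →
    q ∈ v.keys ∨ q ∈ l.map Prod.fst := by
  induction l with
  | nil => intro v q h; exact Or.inl h
  | cons jb l' ih =>
    intro v q h
    simp only [List.foldl_cons] at h
    rcases ih _ _ h with h' | h'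
    · by_cases hx : PySem.Int.mod (v.getD jb.1 0 - c * jb.2) pvPRIME = 0
      · simp only [hx, if_true, ite_true] at h'
        exact Or.inl (mem_keys_erase _ _ _ h')
      · simp only [hx, if_false, ite_false] at h'
        rcases (PySem.Dict.mem_keys_insert _ _ _ _).mp h' with h'' | h''
        · exact Or.inr (by simp [h''])
        · exact Or.inl h''
    · exact Or.inr (by simp [h'])

theorem sub_nodup (c : Int) (l : List (Int × Int)) :
    ∀ (v : PySem.Dict Int Int), v.keys.Nodup →
    (l.foldl (fun v jb =>
      let x := PySem.Int.mod (v.getD jb.1 0 - c * jb.2) pvPRIME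
      if x = 0 then v.erase jb.1 else v.insert jb.1 x) v).keys.Nodup := by
  induction l with
  | nil => intro v h; exact h
  | cons jb l' ih =>
    intro v h
    simp only [List.foldl_cons]
    apply ih
    by_cases hx : PySem.Int.mod (v.getD jb.1 0 - c * jb.2) pvPRIME = 0
    · simp only [hx, if_true, ite_true]; exact nodup_keys_erase _ _ h
    · simp only [hx, if_false, ite_false]; exact PySem.Dict.nodup_keys_insert _ _ _ h

-- invariant of a working row: keys unique, values in (0, PRIME)
def VGood (v : PySem.Dict Int Int) : Prop :=
  v.keys.Nodup ∧ ∀ jv ∈ v.items, 0 < jv.2 ∧ jv.2 < pvPRIME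

theorem sub_values (c : Int) (l : List (Int × Int)) :
    ∀ (v : PySem.Dict Int Int), (∀ jv ∈ v.items, 0 < jv.2 ∧ jv.2 < pvPRIME) →
    ∀ jv ∈ (l.foldl (fun v jb =>
      let x := PySem.Int.mod (v.getD jb.1 0 - c * jb.2) pvPRIME
      if x = 0 then v.erase jb.1 else v.insert jb.1 x) v).items, 0 < jv.2 ∧ jv.2 < pvPRIME := by
  induction l with
  | nil => intro v h; exact h
  | cons jb l' ih =>
    intro v h
    simp only [List.foldl_cons]
    apply ih
    intro jv hjv
    by_cases hx : PySem.Int.mod (v.getD jb.1 0 - c * jb.2) pvPRIME = 0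
    · simp only [hx, if_true, ite_true] at hjv
      exact h _ (mem_items_erase _ _ _ hjv)
    · simp only [hx, if_false, ite_false] at hjv
      rcases (PySem.Dict.mem_items_insert _ _ _ _).mp hjv with h' | h'
      · subst h'
        have hP : (0:Int) < pvPRIME := by norm_num [pvPRIME]
        have hge := PySem.Int.mod_nonneg (v.getD jb.1 0 - c * jb.2) hP
        have hlt := PySem.Int.mod_lt (v.getD jb.1 0 - c * jb.2) hP
        exact ⟨lt_of_le_of_ne (by simpa using hge) (by simpa using Ne.symm hx), by simpa using hlt⟩
      · exact h _ h'.1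

theorem sub_pivot_none (c p : Int) (l : List (Int × Int)) :
    ∀ (v : PySem.Dict Int Int), (l.map Prod.fst).Nodup → (p, (1 : Int)) ∈ l →
    v.getD p 0 = c →
    (l.foldl (fun v jb =>
      let x := PySem.Int.mod (v.getD jb.1 0 - c * jb.2) pvPRIME
      if x = 0 then v.erase jb.1 else v.insert jb.1 x) v).get? p = none := by
  induction l with
  | nil => intro v _ hmem _; simp at hmem
  | cons jb l' ih =>
    intro v hnd hmem hc
    simp only [List.map_cons, List.nodup_cons] at hnd
    simp only [List.foldl_cons]
    rcases List.mem_cons.mp hmem with heq | hmem'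
    · have hj : jb.1 = p := by rw [← heq]
      have hb2 : jb.2 = 1 := by rw [← heq]
      have hx : PySem.Int.mod (v.getD jb.1 0 - c * jb.2) pvPRIME = 0 := by
        rw [hj, hb2, hc]
        simp [PySem.Int.mod_eq_emod_of_pos (by norm_num [pvPRIME] : (0:Int) < pvPRIME)]
      simp only [hx, if_true, ite_true]
      rw [sub_get?_of_not_mem c l' _ p (by rw [← hj]; exact hnd.1)]
      simp [get?_erase, hj]
    · have hp : p ∈ l'.map Prod.fst := List.mem_map.mpr ⟨_, hmem', rfl⟩
      have hjp : jb.1 ≠ p := fun h => hnd.1 (h ▸ hp)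
      apply ih _ hnd.2 hmem'
      have hpg : ((if PySem.Int.mod (v.getD jb.1 0 - c * jb.2) pvPRIME = 0 then v.erase jb.1
          else v.insert jb.1 (PySem.Int.mod (v.getD jb.1 0 - c * jb.2) pvPRIME)).get? p)
          = v.get? p := by
        by_cases hx : PySem.Int.mod (v.getD jb.1 0 - c * jb.2) pvPRIME = 0
        · rw [if_pos hx, get?_erase, if_neg (fun h : p = jb.1 => hjp h.symm)]
        · rw [if_neg hx, PySem.Dict.get?_insert_of_ne _ _ (fun h : p = jb.1 => hjp h.symm)]
      show ((if PySem.Int.mod (v.getD jb.1 0 - c * jb.2) pvPRIME = 0 then v.erase jb.1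
          else v.insert jb.1 (PySem.Int.mod (v.getD jb.1 0 - c * jb.2) pvPRIME)).getD p 0) = c
      rw [PySem.Dict.getD, hpg, ← PySem.Dict.getD, hc]

theorem sureduceVecE_get?_pivot (c p : Int) (v row : PySem.Dict Int Int)
    (hnd : row.keys.Nodup) (h1 : row.get? p = some 1) (hc : v.getD p 0 = c) :
    (sureduceVecE c v row).get? p = none := by
  unfold sureduceVecE
  exact sub_pivot_none c p row.items v (by simpa [PySem.Dict.keys] using hnd)
    (PySem.Dict.mem_items_of_get?_eq_some _ h1) hc

-- maxKey facts
theorem maxKey_none_iff (v : PySem.Dict Int Int) : maxKey v = none ↔ v.items = [] := by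
  unfold maxKey
  rw [PySem.List.max?_eq_none_iff]
  simp [PySem.Dict.keys]

theorem maxKey_mem (v : PySem.Dict Int Int) (t : Int) (h : maxKey v = some t) : t ∈ v.keys :=
  PySem.List.max?_mem h

theorem maxKey_le (v : PySem.Dict Int Int) (t : Int) (h : maxKey v = some t) :
    ∀ q ∈ v.keys, q ≤ t := by
  intro q hq
  exact PySem.List.max?_isMax h q hq

theorem get?_range (v : PySem.Dict Int Int) (t : Int) (hv : VGood v) (ht : t ∈ v.keys) :
    ∃ cval, v.get? t = some cval ∧ 0 < cval ∧ cval < pvPRIME := by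
  cases hg : v.get? t with
  | none =>
    exact absurd ht ((PySem.Dict.get?_eq_none_iff_not_mem_keys _ _).mp hg)
  | some cval =>
    have := hv.2 (t, cval) (PySem.Dict.mem_items_of_get?_eq_some _ hg)
    exact ⟨cval, rfl, this.1, this.2⟩

-- scaling: A's in-place key loop = B's fresh comprehension = a map over the items
theorem scaleRow_items (w : PySem.Dict Int Int) (inv : Int) (hnd : w.keys.Nodup) :
    (scaleRow w inv).items = w.items.map (fun jv => (jv.1, PySem.Int.mod (jv.2 * inv) pvPRIME)) := by
  unfold scaleRow
  rw [PySem.Dict.items_foldl_insert_fresh (k := Prod.fst)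
    (v := fun jv => PySem.Int.mod (jv.2 * inv) pvPRIME)]
  · simp [PySem.Dict.empty]
  · intro a _; simp [PySem.Dict.contains, PySem.Dict.empty]
  · exact hnd

theorem normA_aux (inv : Int) :
    ∀ (todo done : List (Int × Int)), ((done ++ todo).map Prod.fst).Nodup →
    (todo.map Prod.fst).foldl
      (fun w j => w.insert j (PySem.Int.mod (w.getD j 0 * inv) pvPRIME))
      (PySem.Dict.mk (done ++ todo))
    = PySem.Dict.mk (done ++ todo.map (fun jv => (jv.1, PySem.Int.mod (jv.2 * inv) pvPRIME))) := by
  intro todo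
  induction todo with
  | nil => intro done _; simp
  | cons jv todo' ih =>
    intro done hnd
    have hnd1 := hnd
    rw [List.map_append] at hnd1
    obtain ⟨hA, hB, hAB⟩ := List.nodup_append.mp hnd1
    simp only [List.map_cons, List.nodup_cons] at hB
    have hjt : jv.1 ∉ todo'.map Prod.fst := hB.1
    have hjdone : jv.1 ∉ done.map Prod.fst := fun h => hAB _ h _ (by simp) rfl
    have hget : (PySem.Dict.mk (done ++ jv :: todo')).get? jv.1 = some jv.2 := by
      simp only [PySem.Dict.get?, List.find?_append]
      rw [List.find?_eq_none.mpr, Option.none_or,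
        List.find?_cons_of_pos (by simp)]
      · simp
      · intro x hx
        simp only [beq_iff_eq]
        exact fun hh => hjdone (hh ▸ List.mem_map.mpr ⟨x, hx, rfl⟩)
    have hcont : (PySem.Dict.mk (done ++ jv :: todo')).contains jv.1 = true := by
      rw [PySem.Dict.contains_eq_isSome_get?, hget]; rfl
    have hgetD : (PySem.Dict.mk (done ++ jv :: todo')).getD jv.1 0 = jv.2 := by
      rw [PySem.Dict.getD, hget]; rfl
    simp only [List.map_cons, List.foldl_cons]
    rw [hgetD]
    have hins : (PySem.Dict.mk (done ++ jv :: todo')).insert jv.1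
        (PySem.Int.mod (jv.2 * inv) pvPRIME)
        = PySem.Dict.mk (done ++ (jv.1, PySem.Int.mod (jv.2 * inv) pvPRIME) :: todo') := by
      simp only [PySem.Dict.insert, hcont, if_true, ite_true]
      congr 1
      rw [List.map_append, List.map_cons, BEq.rfl, if_pos rfl]
      congr 1
      · have hid : ∀ p ∈ done,
            (if (p.1 == jv.1) = true then (jv.1, PySem.Int.mod (jv.2 * inv) pvPRIME) else p)
              = id p := by
          intro p hp
          rw [if_neg, id]
          simp only [beq_iff_eq]
          exact fun hh => hjdone (hh ▸ List.mem_map.mpr ⟨p, hp, rfl⟩)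
        rw [List.map_congr_left hid, List.map_id]
      · congr 1
        have hid : ∀ p ∈ todo',
            (if (p.1 == jv.1) = true then (jv.1, PySem.Int.mod (jv.2 * inv) pvPRIME) else p)
              = id p := by
          intro p hp
          rw [if_neg, id]
          simp only [beq_iff_eq]
          exact fun hh => hjt (hh ▸ List.mem_map.mpr ⟨p, hp, rfl⟩)
        rw [List.map_congr_left hid, List.map_id]
    rw [hins]
    have hre : done ++ (jv.1, PySem.Int.mod (jv.2 * inv) pvPRIME) :: todo'
        = (done ++ [(jv.1, PySem.Int.mod (jv.2 * inv) pvPRIME)]) ++ todo' := by simp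
    rw [hre, ih]
    · simp
    · have hfst : ((done ++ [(jv.1, PySem.Int.mod (jv.2 * inv) pvPRIME)]) ++ todo').map Prod.fst
          = (done ++ jv :: todo').map Prod.fst := by simp
      rw [hfst]
      exact hnd

theorem normA_eq_scaleRow (w : PySem.Dict Int Int) (inv : Int) (hnd : w.keys.Nodup) :
    normA w inv = scaleRow w inv := by
  have h := normA_aux inv w.items []
    (by simpa [PySem.Dict.keys] using hnd)
  simp only [List.nil_append] at h
  apply PySem.Dict.ext
  rw [scaleRow_items w inv hnd]
  unfold normA
  have hkeys : w.keys = w.items.map Prod.fst := rfl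
  rw [hkeys]
  have heta : PySem.Dict.mk w.items = w := rfl
  rw [heta] at h
  rw [h]

-- Fermat: for 0 < cval < PRIME, cval * pow(cval, PRIME-2, PRIME) % PRIME = 1
theorem fermat_inv (cval : Int) (h0 : 0 < cval) (h1 : cval < pvPRIME) :
    PySem.Int.mod (cval * PySem.Int.powMod cval 1000001 pvPRIME) pvPRIME = 1 := by
  haveI : Fact (Nat.Prime 1000003) := ⟨by norm_num⟩
  have hpv : pvPRIME = (1000003 : Int) := rfl
  rw [PySem.Int.powMod, hpv] at *
  rw [PySem.Int.mod_eq_emod_of_pos (by norm_num), PySem.Int.mod_eq_emod_of_pos (by norm_num)]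
  have key : (cval * (cval ^ 1000001 % 1000003)) % 1000003 = (cval ^ 1000002) % 1000003 := by
    conv_rhs => rw [show (1000002 : ℕ) = 1 + 1000001 by norm_num, pow_add, pow_one]
    conv_lhs => rw [Int.mul_emod, Int.emod_emod_of_dvd _ dvd_rfl, ← Int.mul_emod]
  rw [key]
  have h1' : cval < 1000003 := by simpa [pvPRIME] using h1
  have hcz : (cval : ZMod 1000003) ≠ 0 := by
    intro h
    rw [ZMod.intCast_zmod_eq_zero_iff_dvd] at h
    have hle := Int.le_of_dvd h0 h
    norm_num at hle
    omega
  have hfl : (cval : ZMod 1000003) ^ 1000002 = 1 := by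
    have := ZMod.pow_card_sub_one_eq_one hcz
    norm_num at this
    exact this
  have : ((cval ^ 1000002 : Int) : ZMod 1000003) = ((1 : Int) : ZMod 1000003) := by
    push_cast
    rw [hfl]
  rw [ZMod.intCast_eq_intCast_iff] at this
  calc cval ^ 1000002 % 1000003 = 1 % 1000003 := this
    _ = 1 := by norm_num

theorem mod_inv_eq (cval : Int) (h0 : 0 ≤ cval) (h1 : cval < pvPRIME) :
    mod_inv cval = PySem.Int.powMod cval 1000001 pvPRIME := by
  unfold mod_inv
  rw [PySem.Int.mod_eq_emod_of_pos (by norm_num [pvPRIME]), Int.emod_eq_of_lt h0 h1]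

-- the initial reduced vector is well-formed
theorem reduceVec_good (vec0 : List (Int × Int)) : VGood (reduceVec vec0) := by
  unfold reduceVec
  have main : ∀ (l : List (Int × Int)) (acc : PySem.Dict Int Int), acc.keys.Nodup →
      (∀ jv ∈ acc.items, 0 < jv.2 ∧ jv.2 < pvPRIME) →
      VGood (l.foldl (fun acc jv =>
        if PySem.Int.mod jv.2 pvPRIME ≠ 0 then acc.insert jv.1 (PySem.Int.mod jv.2 pvPRIME)
        else acc) acc) := by
    intro l
    induction l with
    | nil => intro acc h1 h2; exact ⟨h1, h2⟩
    | cons jv l' ih =>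
      intro acc h1 h2
      simp only [List.foldl_cons]
      by_cases hx : PySem.Int.mod jv.2 pvPRIME ≠ 0
      · rw [if_pos hx]
        apply ih
        · exact PySem.Dict.nodup_keys_insert _ _ _ h1
        · intro p hp
          rcases (PySem.Dict.mem_items_insert _ _ _ _).mp hp with h' | h'
          · subst h'
            have hP : (0:Int) < pvPRIME := by norm_num [pvPRIME]
            have hge := PySem.Int.mod_nonneg jv.2 hP
            have hlt := PySem.Int.mod_lt jv.2 hP
            exact ⟨lt_of_le_of_ne (by simpa using hge) (by simpa using Ne.symm hx), by simpa using hlt⟩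
          · exact h2 _ h'.1
      · rw [if_neg hx]; exact ih acc h1 h2
  apply main
  · simp [PySem.Dict.empty, PySem.Dict.keys]
  · intro jv hjv; simp [PySem.Dict.empty] at hjv



-- ===== toFun evaluation lemmas =====

theorem castMod (a : Int) :
    ((PySem.Int.mod a pvPRIME : Int) : ZMod 1000003) = (a : ZMod 1000003) := by
  rw [PySem.Int.mod_eq_emod_of_pos (by norm_num [pvPRIME] : (0:Int) < pvPRIME)]
  have h : (1000003 : ZMod 1000003) = 0 := by exact_mod_cast ZMod.natCast_self 1000003
  conv_rhs => rw [← Int.emod_add_mul_ediv a pvPRIME]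
  show ((a % pvPRIME : Int) : ZMod 1000003) = _
  have hpv : pvPRIME = (1000003 : Int) := rfl
  rw [hpv]
  push_cast
  rw [h]
  ring

theorem toFun_of_not_mem {d : PySem.Dict Int Int} {c : Int} (h : c ∉ d.keys) :
    toFun d c = 0 := by
  unfold toFun
  rw [PySem.Dict.getD, (PySem.Dict.get?_eq_none_iff_not_mem_keys _ _).mpr h]
  simp

theorem toFun_zero_of_items_nil {d : PySem.Dict Int Int} (h : d.items = []) :
    ∀ c, toFun d c = 0 := by
  intro c
  apply toFun_of_not_mem
  simp [PySem.Dict.keys, h]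

theorem toFun_of_mem_items {d : PySem.Dict Int Int} {c x : Int} (hnd : d.keys.Nodup)
    (h : (c, x) ∈ d.items) : toFun d c = (x : ZMod 1000003) := by
  unfold toFun
  rw [PySem.Dict.getD_of_mem_items _ h hnd]

-- the `if h j ≠ 0 then insert` builder (reduceVec / reduceVec / elimRow all have this shape)
theorem buildF_get? (h : Int → Int) (q : Int) :
    ∀ (l : List Int) (acc : PySem.Dict Int Int), l.Nodup →
      (∀ j ∈ l, acc.contains j = false) →
      (l.foldl (fun d j => if h j ≠ 0 then d.insert j (h j) else d) acc).get? q
        = if q ∈ l ∧ h q ≠ 0 then some (h q) else acc.get? q := by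
  intro l
  induction l with
  | nil => intro acc _ _; simp
  | cons j l' ih =>
    intro acc hnd hfresh
    simp only [List.nodup_cons] at hnd
    simp only [List.foldl_cons]
    by_cases hj : h j ≠ 0
    · rw [if_pos hj]
      rw [ih _ hnd.2 ?fresh]
      case fresh =>
        intro j' hj'
        rw [PySem.Dict.contains_insert]
        have : (j' == j) = false := by
          simp only [beq_eq_false_iff_ne, ne_eq]
          intro hh; exact hnd.1 (hh ▸ hj')
        rw [this, hfresh j' (List.mem_cons_of_mem _ hj'), Bool.false_or]
      by_cases hq : q ∈ l' ∧ h q ≠ 0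
      · rw [if_pos hq, if_pos ⟨List.mem_cons_of_mem _ hq.1, hq.2⟩]
      · rw [if_neg hq, PySem.Dict.get?_insert]
        by_cases hqj : q = j
        · subst hqj
          rw [if_pos rfl, if_pos ⟨List.mem_cons_self, hj⟩]
        · rw [if_neg hqj, if_neg]
          intro ⟨hmem, hne⟩
          rcases List.mem_cons.mp hmem with h' | h'
          · exact hqj h'
          · exact hq ⟨h', hne⟩
    · rw [if_neg hj]
      rw [ih _ hnd.2 (fun j' hj' => hfresh j' (List.mem_cons_of_mem _ hj'))]
      by_cases hq : q ∈ l' ∧ h q ≠ 0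
      · rw [if_pos hq, if_pos ⟨List.mem_cons_of_mem _ hq.1, hq.2⟩]
      · rw [if_neg hq, if_neg]
        intro ⟨hmem, hne⟩
        rcases List.mem_cons.mp hmem with h' | h'
        · rw [h'] at hne; exact hj hne
        · exact hq ⟨h', hne⟩

theorem buildF_nodup (h : Int → Int) :
    ∀ (l : List Int) (acc : PySem.Dict Int Int), acc.keys.Nodup →
      (l.foldl (fun d j => if h j ≠ 0 then d.insert j (h j) else d) acc).keys.Nodup := by
  intro l
  induction l with
  | nil => intro acc hacc; exact hacc
  | cons j l' ih =>
    intro acc hacc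
    simp only [List.foldl_cons]
    by_cases hj : h j ≠ 0
    · rw [if_pos hj]; exact ih _ (PySem.Dict.nodup_keys_insert _ _ _ hacc)
    · rw [if_neg hj]; exact ih _ hacc

theorem buildF_from_empty (h : Int → Int) (l : List Int) (hnd : l.Nodup) (q : Int) :
    (l.foldl (fun d j => if h j ≠ 0 then d.insert j (h j) else d) PySem.Dict.empty).get? q
      = if q ∈ l ∧ h q ≠ 0 then some (h q) else none := by
  rw [buildF_get? h q l PySem.Dict.empty hnd (fun j _ => by simp [PySem.Dict.contains, PySem.Dict.empty])]
  simp [PySem.Dict.get?, PySem.Dict.empty]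


-- ===== row-builder / scaling / elimination, functionally =====

theorem scaleRow_eq_mk (w : PySem.Dict Int Int) (inv : Int) (hnd : w.keys.Nodup) :
    scaleRow w inv
      = PySem.Dict.mk (w.items.map (fun jv => (jv.1, PySem.Int.mod (jv.2 * inv) pvPRIME))) := by
  apply PySem.Dict.ext
  rw [scaleRow_items w inv hnd]

theorem scaleRow_get? (w : PySem.Dict Int Int) (inv : Int) (hnd : w.keys.Nodup) (q : Int) :
    (scaleRow w inv).get? q = (w.get? q).map (fun x => PySem.Int.mod (x * inv) pvPRIME) := by
  rw [scaleRow_eq_mk w inv hnd]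
  have := get?_mapValues w.items (fun _ x => PySem.Int.mod (x * inv) pvPRIME) q
  simpa using this

theorem scaleRow_keys (w : PySem.Dict Int Int) (inv : Int) (hnd : w.keys.Nodup) :
    (scaleRow w inv).keys = w.keys := by
  rw [scaleRow_eq_mk w inv hnd]
  show (w.items.map _).map Prod.fst = w.items.map Prod.fst
  rw [List.map_map]
  rfl

theorem toFun_scaleRow (w : PySem.Dict Int Int) (inv : Int) (hnd : w.keys.Nodup) (c : Int) :
    toFun (scaleRow w inv) c = (inv : ZMod 1000003) * toFun w c := by
  unfold toFun
  rw [PySem.Dict.getD, PySem.Dict.getD, scaleRow_get? w inv hnd c]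
  cases hg : w.get? c with
  | none => simp
  | some x =>
    show ((PySem.Int.mod (x * inv) pvPRIME : Int) : ZMod 1000003) = _
    rw [castMod]
    simp only [Option.getD_some]
    push_cast
    ring

-- elimRow
theorem elimRow_get? (f : Int) (prow r : PySem.Dict Int Int) (q : Int) :
    (elimRow f prow r).get? q =
      if q ∈ PySem.Set.ofList (r.keys ++ prow.keys) ∧
          PySem.Int.mod (r.getD q 0 - f * prow.getD q 0) pvPRIME ≠ 0
      then some (PySem.Int.mod (r.getD q 0 - f * prow.getD q 0) pvPRIME) else none := by
  unfold elimRow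
  exact buildF_from_empty _ _ (PySem.Set.nodup_ofList _) q

theorem elimRow_nodup (f : Int) (prow r : PySem.Dict Int Int) :
    (elimRow f prow r).keys.Nodup := by
  unfold elimRow
  exact buildF_nodup _ _ _ (by simp [PySem.Dict.empty, PySem.Dict.keys])

theorem toFun_elimRow (f : Int) (prow r : PySem.Dict Int Int) (c : Int) :
    toFun (elimRow f prow r) c = toFun r c - (f : ZMod 1000003) * toFun prow c := by
  have hsub : toFun r c - (f : ZMod 1000003) * toFun prow c
      = ((r.getD c 0 - f * prow.getD c 0 : Int) : ZMod 1000003) := by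
    unfold toFun; push_cast; ring
  rw [hsub]
  unfold toFun
  rw [PySem.Dict.getD, elimRow_get? f prow r c]
  by_cases h : c ∈ PySem.Set.ofList (r.keys ++ prow.keys) ∧
      PySem.Int.mod (r.getD c 0 - f * prow.getD c 0) pvPRIME ≠ 0
  · rw [if_pos h]
    show ((PySem.Int.mod (r.getD c 0 - f * prow.getD c 0) pvPRIME : Int) : ZMod 1000003) = _
    exact castMod _
  · rw [if_neg h]
    show ((0 : Int) : ZMod 1000003) = _
    by_cases hc : c ∈ PySem.Set.ofList (r.keys ++ prow.keys)
    · have hz : PySem.Int.mod (r.getD c 0 - f * prow.getD c 0) pvPRIME = 0 := by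
        by_contra hz; exact h ⟨hc, hz⟩
      rw [← castMod (r.getD c 0 - f * prow.getD c 0), hz]
    · rw [PySem.Set.mem_ofList, List.mem_append] at hc
      push_neg at hc
      have h1 : r.getD c 0 = 0 := by
        rw [PySem.Dict.getD, (PySem.Dict.get?_eq_none_iff_not_mem_keys _ _).mpr hc.1]; rfl
      have h2 : prow.getD c 0 = 0 := by
        rw [PySem.Dict.getD, (PySem.Dict.get?_eq_none_iff_not_mem_keys _ _).mpr hc.2]; rfl
      rw [h1, h2]
      norm_num

theorem elimRow_mem_keys (f : Int) (prow r : PySem.Dict Int Int) (q : Int)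
    (h : q ∈ (elimRow f prow r).keys) :
    (q ∈ r.keys ∨ q ∈ prow.keys) ∧ PySem.Int.mod (r.getD q 0 - f * prow.getD q 0) pvPRIME ≠ 0 := by
  have hc : (elimRow f prow r).contains q = true :=
    (PySem.Dict.contains_iff_mem_keys _ _).mpr h
  rw [PySem.Dict.contains_eq_isSome_get?, elimRow_get? f prow r q] at hc
  by_cases hcase : q ∈ PySem.Set.ofList (r.keys ++ prow.keys) ∧
      PySem.Int.mod (r.getD q 0 - f * prow.getD q 0) pvPRIME ≠ 0
  · refine ⟨?_, hcase.2⟩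
    have := hcase.1
    rw [PySem.Set.mem_ofList, List.mem_append] at this
    exact this
  · rw [if_neg hcase] at hc
    cases hc

theorem elimRow_VGood (f : Int) (prow r : PySem.Dict Int Int) : VGood (elimRow f prow r) := by
  refine ⟨elimRow_nodup f prow r, ?_⟩
  intro jv hjv
  have hg := PySem.Dict.get?_of_mem_items _ hjv (elimRow_nodup f prow r)
  rw [elimRow_get? f prow r jv.1] at hg
  by_cases hcase : jv.1 ∈ PySem.Set.ofList (r.keys ++ prow.keys) ∧
      PySem.Int.mod (r.getD jv.1 0 - f * prow.getD jv.1 0) pvPRIME ≠ 0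
  · rw [if_pos hcase] at hg
    have hval : jv.2 = PySem.Int.mod (r.getD jv.1 0 - f * prow.getD jv.1 0) pvPRIME := by
      injection hg with hh; exact hh.symm
    have hP : (0:Int) < pvPRIME := by norm_num [pvPRIME]
    have hge := PySem.Int.mod_nonneg (r.getD jv.1 0 - f * prow.getD jv.1 0) hP
    have hlt := PySem.Int.mod_lt (r.getD jv.1 0 - f * prow.getD jv.1 0) hP
    rw [hval]
    exact ⟨lt_of_le_of_ne hge (Ne.symm hcase.2), hlt⟩
  · rw [if_neg hcase] at hg
    cases hg


-- ===== A's elimination step, functionally =====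

theorem sub_get?_mem (f : Int) :
    ∀ (l : List (Int × Int)) (v : PySem.Dict Int Int) (q bq : Int),
      (l.map Prod.fst).Nodup → (q, bq) ∈ l →
      (l.foldl (fun v jb =>
        let x := PySem.Int.mod (v.getD jb.1 0 - f * jb.2) pvPRIME
        if x = 0 then v.erase jb.1 else v.insert jb.1 x) v).get? q
      = (if PySem.Int.mod (v.getD q 0 - f * bq) pvPRIME = 0 then none
         else some (PySem.Int.mod (v.getD q 0 - f * bq) pvPRIME)) := by
  intro l
  induction l with
  | nil => intro v q bq _ hmem; simp at hmem
  | cons jb l' ih =>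
    intro v q bq hnd hmem
    simp only [List.map_cons, List.nodup_cons] at hnd
    simp only [List.foldl_cons]
    by_cases hjq : jb.1 = q
    · have hbq : jb = (q, bq) := by
        rcases List.mem_cons.mp hmem with h | h
        · exact h.symm
        · exact absurd (hjq ▸ List.mem_map.mpr ⟨_, h, rfl⟩) hnd.1
      have hq' : q ∉ l'.map Prod.fst := by rw [← hjq]; exact hnd.1
      rw [sub_get?_of_not_mem f l' _ q hq']
      rw [hbq]
      by_cases hx : PySem.Int.mod (v.getD q 0 - f * bq) pvPRIME = 0
      · simp only [hx, if_true, ite_true, get?_erase, if_pos rfl]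
      · simp only [hx, if_false, ite_false, PySem.Dict.get?_insert_self]
    · have hmem' : (q, bq) ∈ l' := by
        rcases List.mem_cons.mp hmem with h | h
        · exact absurd (congrArg Prod.fst h.symm) hjq
        · exact h
      have hgD : ((if PySem.Int.mod (v.getD jb.1 0 - f * jb.2) pvPRIME = 0 then v.erase jb.1
          else v.insert jb.1 (PySem.Int.mod (v.getD jb.1 0 - f * jb.2) pvPRIME)).getD q 0)
          = v.getD q 0 := by
        by_cases hx : PySem.Int.mod (v.getD jb.1 0 - f * jb.2) pvPRIME = 0
        · rw [if_pos hx, PySem.Dict.getD, get?_erase, if_neg (fun h : q = jb.1 => hjq h.symm),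
            ← PySem.Dict.getD]
        · rw [if_neg hx, PySem.Dict.getD,
            PySem.Dict.get?_insert_of_ne _ _ (fun h : q = jb.1 => hjq h.symm), ← PySem.Dict.getD]
      rw [ih _ q bq hnd.2 hmem', hgD]

theorem toFun_sureduceVecE (f : Int) (v b : PySem.Dict Int Int) (hnd : b.keys.Nodup) (c : Int) :
    toFun (sureduceVecE f v b) c = toFun v c - (f : ZMod 1000003) * toFun b c := by
  by_cases hc : c ∈ b.keys
  · have hcont : b.contains c = true := (PySem.Dict.contains_iff_mem_keys _ _).mpr hc
    rw [PySem.Dict.contains_eq_isSome_get?] at hcont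
    obtain ⟨bq, hbq⟩ := Option.isSome_iff_exists.mp hcont
    have hitems : (c, bq) ∈ b.items := PySem.Dict.mem_items_of_get?_eq_some _ hbq
    have hfold := sub_get?_mem f b.items v c bq (by simpa [PySem.Dict.keys] using hnd) hitems
    have hb : toFun b c = (bq : ZMod 1000003) := toFun_of_mem_items hnd hitems
    have hrhs : toFun v c - (f : ZMod 1000003) * toFun b c
        = ((v.getD c 0 - f * bq : Int) : ZMod 1000003) := by
      rw [hb]; unfold toFun; push_cast; ring
    rw [hrhs]
    show ((PySem.Dict.getD (sureduceVecE f v b) c 0 : Int) : ZMod 1000003) = _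
    rw [PySem.Dict.getD]
    unfold sureduceVecE
    rw [hfold]
    by_cases hx : PySem.Int.mod (v.getD c 0 - f * bq) pvPRIME = 0
    · rw [if_pos hx]
      show ((0 : Int) : ZMod 1000003) = _
      rw [← castMod (v.getD c 0 - f * bq), hx]
    · rw [if_neg hx]
      show ((PySem.Int.mod (v.getD c 0 - f * bq) pvPRIME : Int) : ZMod 1000003) = _
      exact castMod _
  · have hb0 : toFun b c = 0 := toFun_of_not_mem hc
    rw [hb0]
    have hun : (sureduceVecE f v b).get? c = v.get? c := by
      unfold sureduceVecE
      exact sub_get?_of_not_mem f b.items v c (by simpa [PySem.Dict.keys] using hc)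
    unfold toFun
    rw [PySem.Dict.getD, PySem.Dict.getD, hun]
    ring

-- ===== A's while-loop =====

def DBasisGood (basis : PySem.Dict Int (PySem.Dict Int Int)) : Prop :=
  basis.keys.Nodup ∧ ∀ pr ∈ basis.items,
    pr.2.keys.Nodup ∧ (∀ k ∈ pr.2.keys, k ≤ pr.1) ∧ pr.2.get? pr.1 = some 1

def basisF (basis : PySem.Dict Int (PySem.Dict Int Int)) : List (Int → ZMod 1000003) :=
  basis.items.map (fun pr => toFun pr.2)

theorem countP_le_of_imp {l : List Int} {p q : Int → Bool} (h : ∀ a ∈ l, p a → q a) :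
    (l.filter p).length ≤ (l.filter q).length := by
  rw [← List.countP_eq_length_filter, ← List.countP_eq_length_filter]
  exact List.countP_mono_left h

theorem filter_le_lt {l : List Int} {t' t : Int} (ht : t ∈ l) (hlt : t' < t) :
    (l.filter (fun q => decide (q ≤ t'))).length < (l.filter (fun q => decide (q ≤ t))).length := by
  obtain ⟨s, u, rfl⟩ := List.append_of_mem ht
  have h1 : ∀ a ∈ s, decide (a ≤ t') = true → decide (a ≤ t) = true := by
    intro a _ h; simp at h ⊢; omega
  have h2 : ∀ a ∈ u, decide (a ≤ t') = true → decide (a ≤ t) = true := by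
    intro a _ h; simp at h ⊢; omega
  have hs := countP_le_of_imp h1
  have hu := countP_le_of_imp h2
  simp only [List.filter_append, List.filter_cons, List.length_append,
    decide_eq_true_eq] at *
  rw [if_neg (by omega), if_pos (by omega)]
  simp only [List.length_cons]
  omega

theorem aloop_spec (basis : PySem.Dict Int (PySem.Dict Int Int)) (rank : Int)
    (hb : DBasisGood basis) :
    ∀ (fuel : Nat) (v : PySem.Dict Int Int) (t : Int),
      maxKey v = some t → VGood v →
      (basis.keys.filter (fun q => decide (q ≤ t))).length < fuel →
      (aloop fuel basis rank v = (basis, rank)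
        ∧ InSpan (basisF basis) (toFun v))
      ∨ (∃ w t', aloop fuel basis rank v
            = (basis.insert t' (normA w (mod_inv (w.getD t' 0))), rank + 1)
          ∧ VGood w ∧ maxKey w = some t' ∧ basis.get? t' = none
          ∧ InSpan (basisF basis) (fun c => toFun v c - toFun w c)) := by
  intro fuel
  induction fuel with
  | zero => intro v t _ _ hfuel; omega
  | succ fuel ih =>
    intro v t hmax hvg hfuel
    cases hbt : basis.get? t with
    | none =>
      right
      refine ⟨v, t, ?_, hvg, hmax, hbt, ?_⟩
      · simp only [aloop, hmax, hbt]
      · exact inSpan_ext InSpan.zero (fun c => by ring)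
    | some b =>
      have hmemb : (t, b) ∈ basis.items := PySem.Dict.mem_items_of_get?_eq_some _ hbt
      have hrow := hb.2 (t, b) hmemb
      have hfb : toFun b ∈ basisF basis := List.mem_map.mpr ⟨(t, b), hmemb, rfl⟩
      have htkeys : t ∈ basis.keys := by simpa using PySem.Dict.mem_keys_of_mem_items _ hmemb
      set f := v.getD t 0 with hf
      have hsubE : sureduceVecA f v b = sureduceVecE f v b := subA_eq_subE f v b
      have hv' : VGood (sureduceVecA f v b) := by
        rw [hsubE]
        exact ⟨sub_nodup f b.items v hvg.1, sub_values f b.items v hvg.2⟩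
      have htf : ∀ c, toFun (sureduceVecA f v b) c = toFun v c - (f : ZMod 1000003) * toFun b c := by
        intro c; rw [hsubE]; exact toFun_sureduceVecE f v b hrow.1 c
      have hkb : ∀ q ∈ (sureduceVecA f v b).keys, q < t := by
        intro q hq
        rw [hsubE] at hq
        have hle : q ≤ t := by
          rcases sub_mem_keys f b.items v q hq with h | h
          · exact maxKey_le v t hmax q h
          · rcases List.mem_map.mp h with ⟨x, hx, rfl⟩
            exact hrow.2.1 x.1 (List.mem_map.mpr ⟨x, hx, rfl⟩)
        have hne : q ≠ t := by
          intro hqt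
          subst hqt
          have := sureduceVecE_get?_pivot f q v b hrow.1 hrow.2.2 rfl
          exact (PySem.Dict.get?_eq_none_iff_not_mem_keys _ _).mp this hq
        omega
      have hstep : aloop (fuel + 1) basis rank v = aloop fuel basis rank (sureduceVecA f v b) := by
        simp only [aloop, hmax, hbt, ← hf]
      cases hmax' : maxKey (sureduceVecA f v b) with
      | none =>
        left
        have hz : ∀ c, toFun (sureduceVecA f v b) c = 0 :=
          toFun_zero_of_items_nil ((maxKey_none_iff _).mp hmax')
        have hcnt : 1 ≤ (basis.keys.filter (fun q => decide (q ≤ t))).length := by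
          have : t ∈ basis.keys.filter (fun q => decide (q ≤ t)) :=
            List.mem_filter.mpr ⟨htkeys, by simp⟩
          exact List.length_pos_of_mem this
        obtain ⟨fuel', rfl⟩ : ∃ fuel', fuel = fuel' + 1 := ⟨fuel - 1, by omega⟩
        constructor
        · rw [hstep]
          simp only [aloop, hmax']
        · have : ∀ c, toFun v c = (f : ZMod 1000003) * toFun b c := by
            intro c
            have := htf c
            rw [hz c] at this
            linear_combination -this
          exact inSpan_ext (inSpan_smul (f : ZMod 1000003) (inSpan_mem hfb))
            (fun c => (this c).symm)
      | some t' =>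
        have ht' : t' < t := hkb t' (maxKey_mem _ _ hmax')
        have hmeas : (basis.keys.filter (fun q => decide (q ≤ t'))).length < fuel := by
          have := filter_le_lt htkeys ht'
          omega
        rcases ih (sureduceVecA f v b) t' hmax' hv' hmeas with ⟨heq, hsp⟩ | ⟨w, t2, heq, hw, hmw, hb2, hsp⟩
        · left
          refine ⟨by rw [hstep, heq], ?_⟩
          have : ∀ c, toFun v c
              = (f : ZMod 1000003) * toFun b c + toFun (sureduceVecA f v b) c := by
            intro c; rw [htf c]; ring
          exact inSpan_ext (inSpan_add (inSpan_smul _ (inSpan_mem hfb)) hsp)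
            (fun c => by rw [this c])
        · right
          refine ⟨w, t2, by rw [hstep, heq], hw, hmw, hb2, ?_⟩
          have : ∀ c, toFun v c - toFun w c
              = (f : ZMod 1000003) * toFun b c + (toFun (sureduceVecA f v b) c - toFun w c) := by
            intro c; rw [htf c]; ring
          exact inSpan_ext (inSpan_add (inSpan_smul _ (inSpan_mem hfb)) hsp)
            (fun c => by rw [this c])


-- ===== A's per-vector step and fold invariant =====

theorem span_iff_of_gens {L M : List (Int → ZMod 1000003)}
    (h1 : ∀ x ∈ L, InSpan M x) (h2 : ∀ x ∈ M, InSpan L x) :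
    ∀ u, InSpan L u ↔ InSpan M u :=
  fun _ => ⟨inSpan_mono h1, inSpan_mono h2⟩

def AInv (basis : PySem.Dict Int (PySem.Dict Int Int)) (rank : Int)
    (S : List (Int → ZMod 1000003)) : Prop :=
  DBasisGood basis ∧ rank = (basis.size : Int) ∧
  (∀ u, InSpan (basisF basis) u ↔ InSpan S u)

def basisE (basis : PySem.Dict Int (PySem.Dict Int Int)) :
    List (Int × (Int → ZMod 1000003)) :=
  basis.items.map (fun pr => (pr.1, toFun pr.2))

theorem basisE_map_snd (basis : PySem.Dict Int (PySem.Dict Int Int)) :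
    (basisE basis).map Prod.snd = basisF basis := by
  simp [basisE, basisF, List.map_map]

theorem basisE_ech (basis : PySem.Dict Int (PySem.Dict Int Int)) (hb : DBasisGood basis) :
    Ech (basisE basis) := by
  constructor
  · have : (basisE basis).map Prod.fst = basis.keys := by
      simp [basisE, List.map_map]
      try rfl
    rw [this]
    exact hb.1
  · intro pr hpr
    rcases List.mem_map.mp hpr with ⟨qr, hqr, rfl⟩
    have hrow := hb.2 qr hqr
    constructor
    · show toFun qr.2 qr.1 ≠ 0
      unfold toFun
      rw [PySem.Dict.getD, hrow.2.2]
      show ((1 : Int) : ZMod 1000003) ≠ 0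
      decide
    · intro c hc
      show toFun qr.2 c = 0
      apply toFun_of_not_mem
      intro hmem
      have := hrow.2.1 c hmem
      omega

theorem astep (basis : PySem.Dict Int (PySem.Dict Int Int)) (rank : Int)
    (S : List (Int → ZMod 1000003)) (vec0 : List (Int × Int))
    (h : AInv basis rank S) :
    AInv (aloop (basis.size + 1) basis rank (reduceVec vec0)).1
         (aloop (basis.size + 1) basis rank (reduceVec vec0)).2
         (S ++ [toFun (reduceVec vec0)]) := by
  obtain ⟨hb, hrk, hiff⟩ := h
  have hrvS : InSpan (basisF basis) (toFun (reduceVec vec0)) →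
      (∀ u, InSpan (basisF basis) u ↔ InSpan (S ++ [toFun (reduceVec vec0)]) u) := by
    intro hrv
    apply span_iff_of_gens
    · intro x hx
      exact inSpan_mono (fun y hy => inSpan_mem (List.mem_append_left _ hy))
        ((hiff x).mp (inSpan_mem hx))
    · intro x hx
      rcases List.mem_append.mp hx with hx | hx
      · exact (hiff x).mpr (inSpan_mem hx)
      · rcases List.mem_singleton.mp hx with rfl
        exact hrv
  cases hmk : maxKey (reduceVec vec0) with
  | none =>
    have heq : aloop (basis.size + 1) basis rank (reduceVec vec0) = (basis, rank) := by
      simp only [aloop, hmk]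
    rw [heq]
    refine ⟨hb, hrk, hrvS ?_⟩
    exact inSpan_ext InSpan.zero
      (fun c => (toFun_zero_of_items_nil ((maxKey_none_iff _).mp hmk) c).symm)
  | some t =>
    have hfuel : (basis.keys.filter (fun q => decide (q ≤ t))).length < basis.size + 1 := by
      have h1 := List.length_filter_le (fun q => decide (q ≤ t)) basis.keys
      have h2 : basis.keys.length = basis.size := by
        simp [PySem.Dict.keys, PySem.Dict.size]
      omega
    rcases aloop_spec basis rank hb (basis.size + 1) (reduceVec vec0) t hmk
        (reduceVec_good vec0) hfuel with ⟨heq, hsp⟩ | ⟨w, t', heq, hw, hmw, hb2, hsp⟩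
    · rw [heq]
      exact ⟨hb, hrk, hrvS hsp⟩
    · rw [heq]
      -- the fresh pivot t' and the normalized new row
      have ht'w : t' ∈ w.keys := maxKey_mem _ _ hmw
      obtain ⟨cval, hgc, hc0, hcP⟩ := get?_range w t' hw ht'w
      have hgD : w.getD t' 0 = cval := by rw [PySem.Dict.getD, hgc]; rfl
      have hminv : mod_inv (w.getD t' 0) = PySem.Int.powMod cval 1000001 pvPRIME := by
        rw [hgD]; exact mod_inv_eq cval (le_of_lt hc0) hcP
      set inv := PySem.Int.powMod cval 1000001 pvPRIME with hinv
      have hnorm : normA w (mod_inv (w.getD t' 0)) = scaleRow w inv := by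
        rw [hminv]; exact normA_eq_scaleRow w inv hw.1
      have hcontf : basis.contains t' = false := by
        rw [PySem.Dict.contains_eq_isSome_get?, hb2]; rfl
      have hitems' : (basis.insert t' (normA w (mod_inv (w.getD t' 0)))).items
          = basis.items ++ [(t', scaleRow w inv)] := by
        rw [hnorm, PySem.Dict.items_insert_of_not_contains _ _ hcontf]
      have hkeysw : (scaleRow w inv).keys = w.keys := scaleRow_keys w inv hw.1
      have hnew1 : (scaleRow w inv).get? t' = some 1 := by
        rw [scaleRow_get? w inv hw.1, hgc]
        show some (PySem.Int.mod (cval * inv) pvPRIME) = some 1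
        rw [hinv, fermat_inv cval hc0 hcP]
      have hKinv : (cval : ZMod 1000003) * (inv : ZMod 1000003) = 1 := by
        have hm : PySem.Int.mod (cval * inv) pvPRIME = 1 := by
          rw [hinv]; exact fermat_inv cval hc0 hcP
        have h2 := castMod (cval * inv)
        rw [hm] at h2
        push_cast at h2
        exact h2.symm
      constructor
      · -- DBasisGood
        constructor
        · show (basis.insert t' (normA w (mod_inv (w.getD t' 0)))).keys.Nodup
          have : (basis.insert t' (normA w (mod_inv (w.getD t' 0)))).keys
              = basis.keys ++ [t'] := by
            show ((basis.insert t' (normA w (mod_inv (w.getD t' 0)))).items.map Prod.fst) = _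
            rw [hitems']
            simp [PySem.Dict.keys]
          rw [this]
          have ht'nk : t' ∉ basis.keys := by
            intro hmem
            rw [(PySem.Dict.contains_iff_mem_keys _ _).mpr hmem] at hcontf
            cases hcontf
          rw [List.nodup_append]
          refine ⟨hb.1, List.nodup_singleton _, ?_⟩
          intro a ha b hbm
          rw [List.mem_singleton] at hbm
          subst hbm
          intro hab
          exact ht'nk (hab ▸ ha)
        · intro pr hpr
          rw [hitems'] at hpr
          rcases List.mem_append.mp hpr with hpr | hpr
          · exact hb.2 pr hpr
          · rcases List.mem_singleton.mp hpr with rfl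
            refine ⟨by rw [hkeysw]; exact hw.1, ?_, hnew1⟩
            intro k hk
            rw [hkeysw] at hk
            exact maxKey_le w t' hmw k hk
      constructor
      · -- rank
        show rank + 1 = ((basis.insert t' (normA w (mod_inv (w.getD t' 0)))).size : Int)
        have : (basis.insert t' (normA w (mod_inv (w.getD t' 0)))).size = basis.size + 1 := by
          show ((basis.insert t' (normA w (mod_inv (w.getD t' 0)))).items.length) = _
          rw [hitems']
          simp [PySem.Dict.size]
        rw [this, hrk]
        push_cast
        ring
      · -- span
        have hbF' : basisF (basis.insert t' (normA w (mod_inv (w.getD t' 0))))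
            = basisF basis ++ [toFun (scaleRow w inv)] := by
          unfold basisF
          rw [hitems']
          simp
        rw [hbF']
        have hnewF : ∀ c, toFun (scaleRow w inv) c = (inv : ZMod 1000003) * toFun w c :=
          toFun_scaleRow w inv hw.1
        apply span_iff_of_gens
        · intro x hx
          rcases List.mem_append.mp hx with hx | hx
          · exact inSpan_mono (fun y hy => inSpan_mem (List.mem_append_left _ hy))
              ((hiff x).mp (inSpan_mem hx))
          · rcases List.mem_singleton.mp hx with rfl
            -- newF = inv • (rv - (rv - w))
            have hrvw : InSpan (S ++ [toFun (reduceVec vec0)])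
                (fun c => toFun (reduceVec vec0) c - toFun w c) := by
              exact inSpan_mono (fun y hy => inSpan_mem (List.mem_append_left _ hy))
                ((hiff _).mp hsp)
            have hwS : InSpan (S ++ [toFun (reduceVec vec0)]) (toFun w) := by
              have hrv : InSpan (S ++ [toFun (reduceVec vec0)]) (toFun (reduceVec vec0)) :=
                inSpan_mem (List.mem_append_right _ (List.mem_singleton.mpr rfl))
              exact inSpan_ext (inSpan_sub hrv hrvw) (fun c => by ring)
            exact inSpan_ext (inSpan_smul _ hwS) (fun c => (hnewF c).symm)
        · intro x hx
          rcases List.mem_append.mp hx with hx | hx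
          · exact inSpan_mono (fun y hy => inSpan_mem (List.mem_append_left _ hy))
              ((hiff x).mpr (inSpan_mem hx))
          · rcases List.mem_singleton.mp hx with rfl
            -- rv = (cval • newF) + (rv - w)
            have hnewmem : InSpan (basisF basis ++ [toFun (scaleRow w inv)])
                (toFun (scaleRow w inv)) :=
              inSpan_mem (List.mem_append_right _ (List.mem_singleton.mpr rfl))
            have hdmem : InSpan (basisF basis ++ [toFun (scaleRow w inv)])
                (fun c => toFun (reduceVec vec0) c - toFun w c) :=
              inSpan_mono (fun y hy => inSpan_mem (List.mem_append_left _ hy)) hsp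
            have hwspan : InSpan (basisF basis ++ [toFun (scaleRow w inv)]) (toFun w) := by
              apply inSpan_ext (inSpan_smul (cval : ZMod 1000003) hnewmem)
              intro c
              rw [hnewF c, ← mul_assoc, hKinv, one_mul]
            exact inSpan_ext (inSpan_add hwspan hdmem) (fun c => by ring)

theorem afold (vectors : List (List (Int × Int))) :
    ∀ (basis : PySem.Dict Int (PySem.Dict Int Int)) (rank : Int)
      (S : List (Int → ZMod 1000003)), AInv basis rank S →
    AInv (vectors.foldl (fun st vec0 => aloop (st.1.size + 1) st.1 st.2 (reduceVec vec0))
          (basis, rank)).1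
         (vectors.foldl (fun st vec0 => aloop (st.1.size + 1) st.1 st.2 (reduceVec vec0))
          (basis, rank)).2
         (S ++ vectors.map (fun vec0 => toFun (reduceVec vec0))) := by
  induction vectors with
  | nil => intro basis rank S h; simpa using h
  | cons vec0 rest ih =>
    intro basis rank S h
    have hstep := astep basis rank S vec0 h
    have := ih (aloop (basis.size + 1) basis rank (reduceVec vec0)).1
      (aloop (basis.size + 1) basis rank (reduceVec vec0)).2
      (S ++ [toFun (reduceVec vec0)]) hstep
    simpa using this

theorem A_result (vectors : List (List (Int × Int))) (ncols : Int) :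
    ∃ E, Ech E ∧ rank_stream vectors ncols = (E.length : Int) ∧
      (∀ u, InSpan (E.map Prod.snd) u
        ↔ InSpan (vectors.map (fun vec0 => toFun (reduceVec vec0))) u) := by
  have hinit : AInv PySem.Dict.empty 0 [] := by
    refine ⟨⟨by simp [PySem.Dict.empty, PySem.Dict.keys], ?_⟩, by simp [PySem.Dict.empty, PySem.Dict.size], ?_⟩
    · intro pr hpr; simp [PySem.Dict.empty] at hpr
    · intro u
      have : basisF PySem.Dict.empty = [] := by simp [basisF, PySem.Dict.empty]
      rw [this]
  have hres := afold vectors PySem.Dict.empty 0 [] hinit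
  obtain ⟨hb, hrk, hiff⟩ := hres
  refine ⟨basisE (vectors.foldl (fun st vec0 => aloop (st.1.size + 1) st.1 st.2 (reduceVec vec0))
      (PySem.Dict.empty, 0)).1, basisE_ech _ hb, ?_, ?_⟩
  · show (vectors.foldl (fun st vec0 => aloop (st.1.size + 1) st.1 st.2 (reduceVec vec0))
      (PySem.Dict.empty, 0)).2 = _
    rw [hrk]
    congr 1
    simp [basisE, PySem.Dict.size]
  · intro u
    rw [basisE_map_snd]
    simpa using hiff u


-- ===== B-side: collected rows, split, elimination fold =====

theorem collectRows_eq (vectors : List (List (Int × Int))) :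
    collectRows vectors
      = (vectors.filter (fun x => decide ((reduceVec x).items ≠ []))).map reduceVec := by
  unfold collectRows
  have hcongr : vectors.foldl (fun rows vec0 =>
      let r := reduceVec vec0
      if r.items = [] then rows else rows ++ [r]) []
      = vectors.foldl (fun rows vec0 =>
      if (reduceVec vec0).items ≠ [] then rows ++ [reduceVec vec0] else rows) [] := by
    apply PySem.List.foldl_congr_mem
    intro acc x _
    show (if (reduceVec x).items = [] then acc else acc ++ [reduceVec x]) = _
    by_cases h : (reduceVec x).items = [] <;> simp [h]
  rw [hcongr, PySem.List.foldl_append_ite]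
  simp

theorem collect_span (vectors : List (List (Int × Int))) :
    ∀ u, InSpan ((collectRows vectors).map toFun) u
      ↔ InSpan (vectors.map (fun v => toFun (reduceVec v))) u := by
  apply span_iff_of_gens
  · intro x hx
    rw [collectRows_eq] at hx
    rcases List.mem_map.mp hx with ⟨r, hr, rfl⟩
    rcases List.mem_map.mp hr with ⟨v0, hv0, rfl⟩
    have := List.mem_filter.mp hv0
    exact inSpan_mem (List.mem_map.mpr ⟨v0, this.1, rfl⟩)
  · intro x hx
    rcases List.mem_map.mp hx with ⟨v0, hv0, rfl⟩
    by_cases hnil : (reduceVec v0).items = []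
    · exact inSpan_ext InSpan.zero (fun c => (toFun_zero_of_items_nil hnil c).symm)
    · apply inSpan_mem
      rw [collectRows_eq]
      exact List.mem_map.mpr ⟨reduceVec v0,
        List.mem_map.mpr ⟨v0, List.mem_filter.mpr ⟨hv0, by simp [hnil]⟩, rfl⟩, rfl⟩

theorem split_aux_some (c : Int) (p : PySem.Dict Int Int) :
    ∀ (l : List (PySem.Dict Int Int)) (acc : List (PySem.Dict Int Int)),
    l.foldl (fun acc r =>
      match acc.1 with
      | none => if r.contains c then (some r, acc.2) else (none, acc.2 ++ [r])
      | some p' => (some p', acc.2 ++ [r])) (some p, acc) = (some p, acc ++ l) := by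
  intro l
  induction l with
  | nil => intro acc; simp
  | cons r rest ih =>
    intro acc
    simp only [List.foldl_cons]
    rw [ih]
    simp

theorem split_go (c : Int) :
    ∀ (rows acc : List (PySem.Dict Int Int)),
    (rows.foldl (fun acc r =>
        match acc.1 with
        | none => if r.contains c then (some r, acc.2) else (none, acc.2 ++ [r])
        | some p' => (some p', acc.2 ++ [r])) (none, acc) = (none, acc ++ rows)
      ∧ ∀ r ∈ rows, r.contains c = false)
    ∨ (∃ l1 p l2, rows = l1 ++ p :: l2 ∧ (∀ r ∈ l1, r.contains c = false)
        ∧ p.contains c = true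
        ∧ rows.foldl (fun acc r =>
            match acc.1 with
            | none => if r.contains c then (some r, acc.2) else (none, acc.2 ++ [r])
            | some p' => (some p', acc.2 ++ [r])) (none, acc) = (some p, acc ++ (l1 ++ l2))) := by
  intro rows
  induction rows with
  | nil =>
    intro acc
    left
    exact ⟨by simp, fun r hr => absurd hr List.not_mem_nil⟩
  | cons r rest ih =>
    intro acc
    by_cases hc : r.contains c = true
    · right
      refine ⟨[], r, rest, rfl, fun x hx => absurd hx List.not_mem_nil, hc, ?_⟩
      simp only [List.foldl_cons, hc, ite_true]
      rw [split_aux_some]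
      simp
    · have hcf : r.contains c = false := by
        cases h : r.contains c
        · rfl
        · exact absurd h hc
      rcases ih (acc ++ [r]) with ⟨heq, hall⟩ | ⟨l1, p, l2, hsplit, hl1, hp, heq⟩
      · left
        constructor
        · simp only [List.foldl_cons, hcf, Bool.false_eq_true, ite_false]
          rw [heq]
          simp
        · intro x hx
          rcases List.mem_cons.mp hx with rfl | hx
          · exact hcf
          · exact hall x hx
      · right
        refine ⟨r :: l1, p, l2, by rw [hsplit, List.cons_append], ?_, hp, ?_⟩
        · intro x hx
          rcases List.mem_cons.mp hx with rfl | hx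
          · exact hcf
          · exact hl1 x hx
        · simp only [List.foldl_cons, hcf, Bool.false_eq_true, ite_false]
          rw [heq]
          simp

theorem elimFold (c : Int) (prow : PySem.Dict Int Int) (rest : List (PySem.Dict Int Int)) :
    rest.foldl (fun acc r =>
      let f := r.getD c 0
      if f ≠ 0 then acc ++ [elimRow f prow r] else acc ++ [r]) []
    = rest.map (fun r =>
        if r.getD c 0 ≠ 0 then elimRow (r.getD c 0) prow r else r) := by
  have hcongr : rest.foldl (fun acc r =>
      let f := r.getD c 0
      if f ≠ 0 then acc ++ [elimRow f prow r] else acc ++ [r]) []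
      = rest.foldl (fun acc r => acc ++
          [if r.getD c 0 ≠ 0 then elimRow (r.getD c 0) prow r else r]) [] := by
    apply PySem.List.foldl_congr_mem
    intro acc r _
    show (if r.getD c 0 ≠ 0 then acc ++ [elimRow (r.getD c 0) prow r] else acc ++ [r]) = _
    by_cases h : r.getD c 0 ≠ 0 <;> simp [h]
  rw [hcongr, PySem.List.foldl_append_singleton_eq_map]
  simp

-- cols facts
theorem colsOf_mem (rows : List (PySem.Dict Int Int)) (k : Int) :
    k ∈ colsOf rows ↔ ∃ r ∈ rows, k ∈ r.keys := by
  unfold colsOf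
  rw [PySem.List.mem_sorted, PySem.Set.mem_ofList, List.mem_flatMap]

theorem colsOf_sorted (rows : List (PySem.Dict Int Int)) :
    (colsOf rows).Pairwise (fun a b => b < a) := by
  unfold colsOf
  have hge := PySem.List.sorted_pairwise_rev
    (xs := (PySem.Set.ofList (rows.flatMap (fun r => r.keys)) : List Int)) (key := fun x => x)
  have hnd : (PySem.List.sorted (PySem.Set.ofList (rows.flatMap (fun r => r.keys)))
      (fun x : Int => x) true).Nodup :=
    (PySem.List.sorted_perm _ _ _).nodup_iff.mpr (PySem.Set.nodup_ofList _)
  exact (hge.and hnd).imp (fun h => lt_of_le_of_ne h.1 (Ne.symm h.2))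


-- ===== B's column sweep =====

theorem mod_zero_self : PySem.Int.mod 0 pvPRIME = 0 := by
  rw [PySem.Int.mod_eq_emod_of_pos (by norm_num [pvPRIME] : (0:Int) < pvPRIME)]
  simp

theorem bfold (S : List (Int → ZMod 1000003)) :
    ∀ (cs : List Int), ∀ (rows : List (PySem.Dict Int Int))
      (done : List (Int × (Int → ZMod 1000003))) (rank : Int),
      cs.Pairwise (fun a b => b < a) →
      (∀ r ∈ rows, VGood r) →
      (∀ r ∈ rows, ∀ k ∈ r.keys, k ∈ cs) →
      Ech done →
      (∀ pr ∈ done, ∀ c' ∈ cs, c' < pr.1) →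
      rank = (done.length : Int) →
      (∀ u, InSpan (done.map Prod.snd ++ rows.map toFun) u ↔ InSpan S u) →
      ∃ done', Ech done' ∧ (cs.foldl colStep (rows, rank)).2 = (done'.length : Int) ∧
        (∀ u, InSpan (done'.map Prod.snd) u ↔ InSpan S u) := by
  intro cs
  induction cs with
  | nil =>
    intro rows done rank _ hVG hkeys hE _ hrk hiff
    refine ⟨done, hE, hrk, ?_⟩
    intro u
    rw [← hiff u]
    constructor
    · exact inSpan_mono (fun x hx => inSpan_mem (List.mem_append_left _ hx))
    · apply inSpan_mono
      intro x hx
      rcases List.mem_append.mp hx with hx | hx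
      · exact inSpan_mem hx
      · rcases List.mem_map.mp hx with ⟨r, hr, rfl⟩
        have hnil : r.items = [] := by
          have hk : r.keys = [] := by
            rw [List.eq_nil_iff_forall_not_mem]
            exact fun k hk => absurd (hkeys r hr k hk) List.not_mem_nil
          exact List.map_eq_nil_iff.mp hk
        exact inSpan_ext InSpan.zero (fun c => (toFun_zero_of_items_nil hnil c).symm)
  | cons c cs' ih =>
    intro rows done rank hpw hVG hkeys hE hdp hrk hiff
    obtain ⟨hclt, hpw'⟩ := List.pairwise_cons.mp hpw
    have hsplit_go := split_go c rows []
    rcases hsplit_go with ⟨heq, hall⟩ | ⟨l1, p, l2, hdecomp, hl1, hpc, heq⟩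
    · -- no pivot in this column
      have hsp : splitPivot c rows = (none, rows) := by
        show rows.foldl _ (none, []) = _
        rw [heq]
        simp
      have hcol : colStep (rows, rank) c = (rows, rank) := by
        unfold colStep
        rw [hsp]
      rw [List.foldl_cons, hcol]
      apply ih rows done rank hpw' hVG ?keys hE ?dp hrk hiff
      case keys =>
        intro r hr k hk
        have := hkeys r hr k hk
        rcases List.mem_cons.mp this with rfl | h
        · exfalso
          have : r.contains k = true := (PySem.Dict.contains_iff_mem_keys _ _).mpr hk
          rw [hall r hr] at this
          cases this
        · exact h
      case dp =>
        intro pr hpr c' hc'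
        exact hdp pr hpr c' (List.mem_cons_of_mem _ hc')
    · -- pivot found
      have hsp : splitPivot c rows = (some p, l1 ++ l2) := by
        show rows.foldl _ (none, []) = _
        rw [heq]
        simp
      set pinv := PySem.Int.powMod (p.getD c 0) 1000001 pvPRIME with hpinv
      set prow := scaleRow p pinv with hprow
      have hcol : colStep (rows, rank) c
          = ((l1 ++ l2).map (fun r =>
              if r.getD c 0 ≠ 0 then elimRow (r.getD c 0) prow r else r), rank + 1) := by
        unfold colStep
        rw [hsp]
        simp only []
        rw [elimFold]
      set g := fun r : PySem.Dict Int Int => if r.getD c 0 ≠ 0 then elimRow (r.getD c 0) prow r else r with hg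
      -- facts about the pivot row
      have hpmem : p ∈ rows := by
        rw [hdecomp]
        exact List.mem_append_right _ List.mem_cons_self
      have hrest_sub : ∀ r ∈ l1 ++ l2, r ∈ rows := by
        intro r hr
        rw [hdecomp]
        rcases List.mem_append.mp hr with h | h
        · exact List.mem_append_left _ h
        · exact List.mem_append_right _ (List.mem_cons_of_mem _ h)
      have hpgood : VGood p := hVG p hpmem
      have hck : c ∈ p.keys := (PySem.Dict.contains_iff_mem_keys _ _).mp hpc
      obtain ⟨cval, hgc, hc0, hcP⟩ := get?_range p c hpgood hck
      have hgD : p.getD c 0 = cval := by rw [PySem.Dict.getD, hgc]; rfl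
      have hKinv : (cval : ZMod 1000003) * (pinv : ZMod 1000003) = 1 := by
        have hm : PySem.Int.mod (cval * pinv) pvPRIME = 1 := by
          rw [hpinv, hgD]; exact fermat_inv cval hc0 hcP
        have h2 := castMod (cval * pinv)
        rw [hm] at h2
        push_cast at h2
        exact h2.symm
      have hprowkeys : prow.keys = p.keys := by
        rw [hprow]; exact scaleRow_keys p pinv hpgood.1
      have hprow1 : prow.get? c = some 1 := by
        rw [hprow, scaleRow_get? p pinv hpgood.1, hgc]
        show some (PySem.Int.mod (cval * pinv) pvPRIME) = some 1
        rw [hpinv, hgD]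
        rw [fermat_inv cval hc0 hcP]
      have hprowD1 : prow.getD c 0 = 1 := by rw [PySem.Dict.getD, hprow1]; rfl
      have htFprow : ∀ c', toFun prow c' = (pinv : ZMod 1000003) * toFun p c' := by
        intro c'; rw [hprow]; exact toFun_scaleRow p pinv hpgood.1 c'
      have hpkc : ∀ k ∈ p.keys, k ∈ c :: cs' := fun k hk => hkeys p hpmem k hk
      -- row-by-row facts about rows'
      have hgVG : ∀ r ∈ l1 ++ l2, VGood (g r) := by
        intro r hr
        simp only [hg]
        by_cases hf : r.getD c 0 ≠ 0
        · rw [if_pos hf]; exact elimRow_VGood _ _ _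
        · rw [if_neg hf]; exact hVG r (hrest_sub r hr)
      have hgkeys : ∀ r ∈ l1 ++ l2, ∀ k ∈ (g r).keys, k ∈ cs' := by
        intro r hr k hk
        simp only [hg] at hk
        by_cases hf : r.getD c 0 ≠ 0
        · rw [if_pos hf] at hk
          obtain ⟨hmem, hne⟩ := elimRow_mem_keys _ _ _ _ hk
          have hck' : k ≠ c := by
            intro rfl'
            subst rfl'
            apply hne
            rw [hprowD1]
            have : r.getD k 0 - r.getD k 0 * 1 = 0 := by ring
            rw [this, mod_zero_self]
          have hmem' : k ∈ c :: cs' := by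
            rcases hmem with h | h
            · exact hkeys r (hrest_sub r hr) k h
            · rw [hprowkeys] at h
              exact hpkc k h
          rcases List.mem_cons.mp hmem' with h | h
          · exact absurd h hck'
          · exact h
        · rw [if_neg hf] at hk
          have hmem' := hkeys r (hrest_sub r hr) k hk
          rcases List.mem_cons.mp hmem' with rfl | h
          · exfalso
            obtain ⟨val, hv, hv0, _⟩ := get?_range r k (hVG r (hrest_sub r hr)) hk
            have : r.getD k 0 = val := by rw [PySem.Dict.getD, hv]; rfl
            rw [this] at hf
            exact hf (by omega)
          · exact h
      -- the new echelon entry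
      have hnewrow : EchRow (c, toFun prow) := by
        constructor
        · show toFun prow c ≠ 0
          unfold toFun
          rw [hprowD1]
          decide
        · intro d hd
          show toFun prow d = 0
          apply toFun_of_not_mem
          rw [hprowkeys]
          intro hmem
          rcases List.mem_cons.mp (hpkc d hmem) with rfl | h
          · omega
          · have := hclt d h
            omega
      have hE' : Ech (done ++ [(c, toFun prow)]) := by
        constructor
        · rw [List.map_append, List.nodup_append]
          refine ⟨hE.1, by simp, ?_⟩
          intro a ha b hb
          simp only [List.map_cons, List.map_nil, List.mem_singleton] at hb
          subst hb
          rcases List.mem_map.mp ha with ⟨pr, hpr, rfl⟩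
          have := hdp pr hpr b List.mem_cons_self
          omega
        · intro pr hpr
          rcases List.mem_append.mp hpr with h | h
          · exact hE.2 pr h
          · rcases List.mem_singleton.mp h with rfl
            exact hnewrow
      have hdp' : ∀ pr ∈ done ++ [(c, toFun prow)], ∀ c' ∈ cs', c' < pr.1 := by
        intro pr hpr c' hc'
        rcases List.mem_append.mp hpr with h | h
        · exact hdp pr h c' (List.mem_cons_of_mem _ hc')
        · rcases List.mem_singleton.mp h with rfl
          exact hclt c' hc'
      -- span preservation
      have hiff' : ∀ u,
          InSpan ((done ++ [(c, toFun prow)]).map Prod.snd ++ ((l1 ++ l2).map g).map toFun) u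
          ↔ InSpan (done.map Prod.snd ++ rows.map toFun) u := by
        have hprow_old : InSpan (done.map Prod.snd ++ rows.map toFun) (toFun prow) := by
          have hp_mem : toFun p ∈ done.map Prod.snd ++ rows.map toFun :=
            List.mem_append_right _ (List.mem_map.mpr ⟨p, hpmem, rfl⟩)
          exact inSpan_ext (inSpan_smul _ (inSpan_mem hp_mem)) (fun c' => (htFprow c').symm)
        have hprow_new : InSpan
            ((done ++ [(c, toFun prow)]).map Prod.snd ++ ((l1 ++ l2).map g).map toFun)
            (toFun prow) := by
          apply inSpan_mem
          apply List.mem_append_left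
          rw [List.map_append]
          exact List.mem_append_right _ (by simp)
        apply span_iff_of_gens
        · intro x hx
          rcases List.mem_append.mp hx with hx | hx
          · rw [List.map_append] at hx
            rcases List.mem_append.mp hx with hx | hx
            · exact inSpan_mem (List.mem_append_left _ hx)
            · simp only [List.map_cons, List.map_nil, List.mem_singleton] at hx
              subst hx
              exact hprow_old
          · rcases List.mem_map.mp hx with ⟨r', hr', rfl⟩
            rcases List.mem_map.mp hr' with ⟨r, hr, rfl⟩
            simp only [hg]
            by_cases hf : r.getD c 0 ≠ 0
            · rw [if_pos hf]
              have hr_old : InSpan (done.map Prod.snd ++ rows.map toFun) (toFun r) :=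
                inSpan_mem (List.mem_append_right _ (List.mem_map.mpr ⟨r, hrest_sub r hr, rfl⟩))
              have := inSpan_sub hr_old
                (inSpan_smul ((r.getD c 0 : Int) : ZMod 1000003) hprow_old)
              exact inSpan_ext this (fun c' => (toFun_elimRow _ _ _ c').symm)
            · rw [if_neg hf]
              exact inSpan_mem (List.mem_append_right _
                (List.mem_map.mpr ⟨r, hrest_sub r hr, rfl⟩))
        · intro x hx
          rcases List.mem_append.mp hx with hx | hx
          · apply inSpan_mem
            apply List.mem_append_left
            rw [List.map_append]
            exact List.mem_append_left _ hx
          · rcases List.mem_map.mp hx with ⟨r, hr, rfl⟩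
            rw [hdecomp] at hr
            have hr_cases : r = p ∨ r ∈ l1 ++ l2 := by
              rcases List.mem_append.mp hr with h | h
              · exact Or.inr (List.mem_append_left _ h)
              · rcases List.mem_cons.mp h with rfl | h
                · exact Or.inl rfl
                · exact Or.inr (List.mem_append_right _ h)
            rcases hr_cases with rfl | hr'
            · -- r = p : p = cval • prow
              apply inSpan_ext (inSpan_smul ((cval : Int) : ZMod 1000003) hprow_new)
              intro c'
              rw [htFprow c', ← mul_assoc, hKinv, one_mul]
            · by_cases hf : r.getD c 0 ≠ 0
              · -- r = elim + f • prow
                have helim_mem : InSpan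
                    ((done ++ [(c, toFun prow)]).map Prod.snd ++ ((l1 ++ l2).map g).map toFun)
                    (toFun (elimRow (r.getD c 0) prow r)) := by
                  apply inSpan_mem
                  apply List.mem_append_right
                  apply List.mem_map.mpr
                  refine ⟨g r, List.mem_map.mpr ⟨r, hr', rfl⟩, ?_⟩
                  simp only [hg]
                  rw [if_pos hf]
                have := inSpan_add helim_mem
                  (inSpan_smul ((r.getD c 0 : Int) : ZMod 1000003) hprow_new)
                apply inSpan_ext this
                intro c'
                rw [toFun_elimRow _ _ _ c']
                ring
              · apply inSpan_mem
                apply List.mem_append_right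
                apply List.mem_map.mpr
                refine ⟨g r, List.mem_map.mpr ⟨r, hr', rfl⟩, ?_⟩
                simp only [hg]
                rw [if_neg hf]
      -- recurse
      rw [List.foldl_cons, hcol]
      apply ih ((l1 ++ l2).map g) (done ++ [(c, toFun prow)]) (rank + 1) hpw'
        (by intro r' hr'; rcases List.mem_map.mp hr' with ⟨r, hr, rfl⟩; exact hgVG r hr)
        (by intro r' hr' k hk; rcases List.mem_map.mp hr' with ⟨r, hr, rfl⟩; exact hgkeys r hr k hk)
        hE' hdp'
        (by rw [hrk]; simp)
        (fun u => (hiff' u).trans (hiff u))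

theorem B_result (vectors : List (List (Int × Int))) (ncols : Int) :
    ∃ E, Ech E ∧ rank_stream_alt vectors ncols = (E.length : Int) ∧
      (∀ u, InSpan (E.map Prod.snd) u
        ↔ InSpan (vectors.map (fun vec0 => toFun (reduceVec vec0))) u) := by
  have hres := bfold (vectors.map (fun vec0 => toFun (reduceVec vec0)))
    (colsOf (collectRows vectors)) (collectRows vectors) [] 0
    (colsOf_sorted _)
    (by
      intro r hr
      rw [collectRows_eq] at hr
      rcases List.mem_map.mp hr with ⟨v0, _, rfl⟩
      exact reduceVec_good v0)
    (by
      intro r hr k hk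
      exact (colsOf_mem _ k).mpr ⟨r, hr, hk⟩)
    ⟨by simp, by intro pr hpr; cases hpr⟩
    (by intro pr hpr; cases hpr)
    (by simp)
    (by
      intro u
      have h0 : ([] : List (Int × (Int → ZMod 1000003))).map Prod.snd
          ++ (collectRows vectors).map toFun = (collectRows vectors).map toFun := by simp
      rw [h0]
      exact collect_span vectors u)
  obtain ⟨done', hE', hrk', hiff'⟩ := hres
  exact ⟨done', hE', hrk', hiff'⟩

-- ===== VERDICT-PROOF =====

-- ===== VERDICT (by name: the statement is the Claim_ definition above) =====
theorem rank_stream_spec : Claim_equal_rank_stream := by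
  intro vectors ncols _
  unfold Spec_rank_stream
  obtain ⟨EA, hEA, hrkA, hiffA⟩ := A_result vectors ncols
  obtain ⟨EB, hEB, hrkB, hiffB⟩ := B_result vectors ncols
  rw [hrkA, hrkB]
  exact_mod_cast ech_size_eq EA EB hEA hEB (fun u => (hiffA u).trans ((hiffB u).symm))
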